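-- pv_equiv track=rewrite | github.com/cornchip1/SSAFY | Algorithm/week7/230403/14244/14244.py | bfs
-- ===== SOURCE A (Python) =====
-- def bfs(s,e):
--
--     # [1] q,v 생성
--     q = [0]*1000000
--     v = [0]*1000001
--     w = r = 0
--
--     # [2] q에 초기 데이터 삽입
--     q[w] = s
--     w = (w+1)%1000000
--     v[s] = 1
--
--     while w != r :
--         c = q[r]
--         r = (r+1) % 1000000
--         if c == e :
--             return v[e]-1
--
--         for n in ((c-1),(c+1),(c*2),(c-10)):
--             if 1 <= n <= 1000000 and v[n] == 0 :
--                 q[w] = n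
--                 w = (w+1) % 1000000
--                 v[n] = v[c] + 1
--     return -1
-- ===== SOURCE B (Python) =====
-- def bfs(s, e):
--     # Search backwards from e over the inverse operations: predecessors of m
--     # are m+1, m-1, m+10 and (if m is even) m//2.  Return value only.
--     if s == e:
--         return 0
--     if not (1 <= e <= 1000000):
--         return -1
--     v = [False] * 1000001
--     v[e] = True
--     frontier = [e]
--     depth = 0
--     while frontier:
--         depth += 1
--         nxt = []
--         for m in frontier:
--             preds = [m + 1, m - 1, m + 10]
--             if m % 2 == 0:
--                 preds.append(m // 2)
--             if s in preds:
--                 return depth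
--             for p in preds:
--                 if 1 <= p <= 1000000 and not v[p]:
--                     v[p] = True
--                     nxt.append(p)
--         frontier = nxt
--     return -1
-- ===== Notes on version B (the rewrite author's own statement) =====
-- stated objective: alternative
-- what changed: B searches backwards from e over the inverse graph (predecessors m+1, m-1, m+10, and m//2 when m is even), returning the first level whose frontier contains a node with s as direct predecessor, instead of A's forward queue BFS from s with distance labels stored in the visited array.
import Mathlib
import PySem

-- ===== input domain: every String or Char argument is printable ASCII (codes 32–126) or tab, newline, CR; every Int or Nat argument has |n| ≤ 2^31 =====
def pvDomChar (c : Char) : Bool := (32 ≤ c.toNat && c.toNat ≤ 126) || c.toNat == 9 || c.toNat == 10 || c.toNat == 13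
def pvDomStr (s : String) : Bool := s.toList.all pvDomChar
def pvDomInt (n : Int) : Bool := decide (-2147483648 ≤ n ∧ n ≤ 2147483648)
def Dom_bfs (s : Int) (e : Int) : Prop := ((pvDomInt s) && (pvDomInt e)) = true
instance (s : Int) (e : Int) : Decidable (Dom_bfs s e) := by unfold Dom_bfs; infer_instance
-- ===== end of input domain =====

-- B replaces A's forward queue BFS (distance labels in the visited array) by a
-- backward search from e over the inverse operations (predecessors m+1, m-1, m+10,
-- m//2 for even m), returning the first level with s as a direct predecessor.
-- Equivalence is about the return value only (neither function mutates its arguments).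

-- Shared array primitives (Python list indexing on our fixed-size lists):
-- `aget`/`aset` (Int cells) and `bget`/`bset` (Bool cells) read/write at a
-- nonnegative index (total; all uses are in bounds on admitted inputs), `wrapIdx`
-- is Python's negative-index wrap for a list of length 1000001 — exact whenever
-- -1000001 ≤ i ≤ 1000000, which Pre_bfs guarantees.
def aget (a : Array Int) (i : Nat) : Int := a.getD i 0
def aset (a : Array Int) (i : Nat) (x : Int) : Array Int := a.setIfInBounds i x
def bget (a : Array Bool) (i : Nat) : Bool := a.getD i false
def bset (a : Array Bool) (i : Nat) (x : Bool) : Array Bool := a.setIfInBounds i x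
def wrapIdx (i : Int) : Nat := if i < 0 then (i + 1000001).toNat else i.toNat

-- ===== PORT A =====
-- one step of A's inner `for n in ((c-1),(c+1),(c*2),(c-10))` loop: state (q, v, w)
def stepA (c : Int) (st : Array Int × Array Int × Nat) (n : Int) : Array Int × Array Int × Nat :=
  if 1 ≤ n ∧ n ≤ 1000000 ∧ aget st.2.1 n.toNat = 0 then
    (aset st.1 st.2.2 n, aset st.2.1 n.toNat (aget st.2.1 (wrapIdx c) + 1), (st.2.2 + 1) % 1000000)
  else st

-- A's `while w != r` loop; fuel only makes it total (2100000 iterations are proved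
-- sufficient: each iteration dequeues one entry, and at most 1+1000000 entries are
-- ever enqueued — the fuel-0 branch is shown unreachable in the proof below).
def loopA (e : Int) : Nat → Array Int → Array Int → Nat → Nat → Int
  | 0, _, _, _, _ => -1
  | f + 1, q, v, w, r =>
    if w ≠ r then
      let c := aget q r
      let r' := (r + 1) % 1000000
      if c = e then aget v (wrapIdx e) - 1
      else
        let st := List.foldl (stepA c) (q, v, w) [c - 1, c + 1, c * 2, c - 10]
        loopA e f st.1 st.2.1 st.2.2 r'
    else -1

def bfs (s : Int) (e : Int) : Int :=
  -- q = [0]*1000000; v = [0]*1000001; q[0] = s; w = 1; v[s] = 1 (wrapIdx: exact under Pre_)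
  let q := aset (Array.replicate 1000000 0) 0 s
  let v := aset (Array.replicate 1000001 0) (wrapIdx s) 1
  loopA e 2100000 q v 1 0

-- ===== PORT B =====
-- preds = [m + 1, m - 1, m + 10]; if m % 2 == 0: preds.append(m // 2)
def predsOf (m : Int) : List Int :=
  if PySem.Int.mod m 2 = 0 then [m + 1, m - 1, m + 10, PySem.Int.floordiv m 2]
  else [m + 1, m - 1, m + 10]

-- B's `for p in preds` loop: state (v, nxt); Python's nxt.append(p) is accumulated
-- reversed (p :: acc) and reversed once per level
def stepR (st : Array Bool × List Int) (p : Int) : Array Bool × List Int :=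
  if 1 ≤ p ∧ p ≤ 1000000 ∧ bget st.1 p.toNat = false then
    (bset st.1 p.toNat true, p :: st.2)
  else st

-- B's `for m in frontier` loop; `none` = the `return depth` exit (s found in preds)
def levelR (s : Int) : List Int → Array Bool → List Int → Option (Array Bool × List Int)
  | [], v, acc => some (v, acc)
  | m :: rest, v, acc =>
    if s ∈ predsOf m then none
    else
      let st := List.foldl stepR (v, acc) (predsOf m)
      levelR s rest st.1 st.2

-- B's `while frontier` loop (depth += 1 happens at the top of the Python loop body);
-- fuel 1000002 proved sufficient: each non-final level marks at least one of the
-- 1000000 markable cells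
def loopR (s : Int) : Nat → Array Bool → List Int → Int → Int
  | 0, _, _, _ => -1
  | g + 1, v, frontier, depth =>
    if frontier ≠ [] then
      match levelR s frontier v [] with
      | none => depth + 1
      | some st => loopR s g st.1 st.2.reverse (depth + 1)
    else -1

def bfs_alt (s : Int) (e : Int) : Int :=
  if s = e then 0
  else if ¬(1 ≤ e ∧ e ≤ 1000000) then -1
  else loopR s 1000002 (bset (Array.replicate 1000001 false) e.toNat true) [e] 0

-- ===== PRECONDITION & SPEC =====
-- Pre_ excludes exactly the s outside [-1000001, 1000000], where Python A's `v[s] = 1`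
-- raises IndexError (list of length 1000001).
def Pre_bfs (s : Int) (e : Int) : Prop := -1000001 ≤ s ∧ s ≤ 1000000
instance (s : Int) (e : Int) : Decidable (Pre_bfs s e) := by unfold Pre_bfs; infer_instance
def pvWitness_bfs : Int × Int := (5, 7)

def Spec_bfs (s : Int) (e : Int) (out : Int) : Prop := out = bfs_alt s e
instance (s : Int) (e : Int) (out : Int) : Decidable (Spec_bfs s e out) := by unfold Spec_bfs; infer_instance

-- ===== CLAIM (what is proved, stated in full; the proofs are below) =====
def Claim_equal_bfs : Prop := ∀ (s : Int) (e : Int), Dom_bfs s e → Pre_bfs s e → Spec_bfs s e (bfs s e)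

-- ===== LEMMAS AND PROOFS =====

--------------------------------------------------------------------------------
-- Part 0: array lemmas
--------------------------------------------------------------------------------

theorem size_aset (a : Array Int) (i : Nat) (x : Int) : (aset a i x).size = a.size := by
  simp [aset]

theorem aget_aset_self (a : Array Int) (i : Nat) (x : Int) (h : i < a.size) :
    aget (aset a i x) i = x := by
  simp [aget, aset, Array.getD, h]

theorem aget_aset_ne (a : Array Int) (i j : Nat) (x : Int) (h : i ≠ j) :
    aget (aset a i x) j = aget a j := by
  by_cases hj : j < a.size
  · simp [aget, aset, Array.getD, hj, h]
  · simp [aget, aset, Array.getD, hj]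

theorem size_bset (a : Array Bool) (i : Nat) (x : Bool) : (bset a i x).size = a.size := by
  simp [bset]

theorem bget_bset_self (a : Array Bool) (i : Nat) (x : Bool) (h : i < a.size) :
    bget (bset a i x) i = x := by
  simp [bget, bset, Array.getD, h]

theorem bget_bset_ne (a : Array Bool) (i j : Nat) (x : Bool) (h : i ≠ j) :
    bget (bset a i x) j = bget a j := by
  by_cases hj : j < a.size
  · simp [bget, bset, Array.getD, hj, h]
  · simp [bget, bset, Array.getD, hj]

theorem wrapIdx_nonneg (i : Int) (h : 0 ≤ i) : wrapIdx i = i.toNat := by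
  simp [wrapIdx, not_lt.2 h]

-- number of still-unmarked cells among indices 1..1000000 (Int array / Bool array)
def U (v : Array Int) : Nat := ((Finset.Icc 1 1000000).filter (fun i => aget v i = 0)).card
def UB (v : Array Bool) : Nat := ((Finset.Icc 1 1000000).filter (fun i => bget v i = false)).card

theorem U_le (v : Array Int) : U v ≤ 1000000 := by
  have h := Finset.card_filter_le (Finset.Icc 1 1000000) (fun i => aget v i = 0)
  simpa using h

theorem UB_le (v : Array Bool) : UB v ≤ 1000000 := by
  have h := Finset.card_filter_le (Finset.Icc 1 1000000) (fun i => bget v i = false)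
  simpa using h

theorem U_mark (v : Array Int) (hs : v.size = 1000001) (n : Nat)
    (h1 : 1 ≤ n) (h2 : n ≤ 1000000) (h0 : aget v n = 0) (x : Int) (hx : x ≠ 0) :
    U v = U (aset v n x) + 1 := by
  have hset : (Finset.Icc 1 1000000).filter (fun i => aget (aset v n x) i = 0)
      = ((Finset.Icc 1 1000000).filter (fun i => aget v i = 0)).erase n := by
    ext i
    simp only [Finset.mem_filter, Finset.mem_erase, Finset.mem_Icc]
    constructor
    · rintro ⟨hi, hz⟩
      by_cases hin : i = n
      · subst hin
        rw [aget_aset_self v i x (by omega)] at hz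
        exact absurd hz hx
      · rw [aget_aset_ne v n i x (fun h => hin h.symm)] at hz
        exact ⟨hin, hi, hz⟩
    · rintro ⟨hin, hi, hz⟩
      refine ⟨hi, ?_⟩
      rw [aget_aset_ne v n i x (fun h => hin h.symm)]
      exact hz
  have hmem : n ∈ (Finset.Icc 1 1000000).filter (fun i => aget v i = 0) := by
    simp [Finset.mem_filter, Finset.mem_Icc, h1, h2, h0]
  have hcard := Finset.card_erase_of_mem hmem
  have hpos : 0 < ((Finset.Icc 1 1000000).filter (fun i => aget v i = 0)).card :=
    Finset.card_pos.2 ⟨n, hmem⟩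
  unfold U
  rw [hset, hcard]
  omega

-- strict decrease of the unmarked count under monotone marking with one fresh mark
theorem U_lt_of (v v' : Array Int)
    (hmono : ∀ i : Nat, 1 ≤ i → i ≤ 1000000 → aget v i ≠ 0 → aget v' i ≠ 0)
    (n : Nat) (h1 : 1 ≤ n) (h2 : n ≤ 1000000) (hz : aget v n = 0) (hnz : aget v' n ≠ 0) :
    U v' < U v := by
  apply Finset.card_lt_card
  rw [Finset.ssubset_iff_of_subset]
  · refine ⟨n, ?_, ?_⟩
    · simp only [Finset.mem_filter, Finset.mem_Icc]
      exact ⟨⟨h1, h2⟩, hz⟩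
    · simp only [Finset.mem_filter, Finset.mem_Icc, not_and]
      intro _
      exact hnz
  · intro i hi
    simp only [Finset.mem_filter, Finset.mem_Icc] at hi ⊢
    refine ⟨hi.1, ?_⟩
    by_contra hvz
    exact hmono i hi.1.1 hi.1.2 hvz hi.2

theorem UB_lt_of (v v' : Array Bool)
    (hmono : ∀ i : Nat, 1 ≤ i → i ≤ 1000000 → bget v i = true → bget v' i = true)
    (n : Nat) (h1 : 1 ≤ n) (h2 : n ≤ 1000000) (hz : bget v n = false) (hnz : bget v' n = true) :
    UB v' < UB v := by
  apply Finset.card_lt_card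
  rw [Finset.ssubset_iff_of_subset]
  · refine ⟨n, ?_, ?_⟩
    · simp only [Finset.mem_filter, Finset.mem_Icc]
      exact ⟨⟨h1, h2⟩, hz⟩
    · simp only [Finset.mem_filter, Finset.mem_Icc, not_and]
      intro _
      rw [hnz]
      simp
  · intro i hi
    simp only [Finset.mem_filter, Finset.mem_Icc] at hi ⊢
    refine ⟨hi.1, ?_⟩
    cases hvi : bget v i with
    | false => rfl
    | true =>
      rw [hmono i hi.1.1 hi.1.2 hvi] at hi
      simp at hi

theorem len_le_999999 (l : List Int) (c : Int) (hnd : l.Nodup)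
    (hmem : ∀ x ∈ l, (1 ≤ x ∧ x ≤ 1000000) ∧ x ≠ c) (hc1 : 1 ≤ c) (hc2 : c ≤ 1000000) :
    l.length ≤ 999999 := by
  have hsub : l.toFinset ⊆ (Finset.Icc (1 : Int) 1000000).erase c := by
    intro x hx
    rw [List.mem_toFinset] at hx
    rcases hmem x hx with ⟨⟨hx1, hx2⟩, hxc⟩
    simp [Finset.mem_erase, Finset.mem_Icc, hx1, hx2, hxc]
  have hcard := Finset.card_le_card hsub
  rw [List.toFinset_card_of_nodup hnd] at hcard
  have hicc : (Finset.Icc (1 : Int) 1000000).card = 1000000 := by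
    rw [Int.card_Icc]
    rfl
  have herase : ((Finset.Icc (1 : Int) 1000000).erase c).card = 999999 := by
    rw [Finset.card_erase_of_mem (by simp [Finset.mem_Icc]; omega), hicc]
  omega

--------------------------------------------------------------------------------
-- Part 1: the forward level-by-level reference BFS (proof-side only) and the
-- simulation  A = F  (queue BFS with distance labels ≡ level BFS)
--------------------------------------------------------------------------------

def stepF (st : Array Int × List Int) (n : Int) : Array Int × List Int :=
  if 1 ≤ n ∧ n ≤ 1000000 ∧ aget st.1 n.toNat = 0 then (aset st.1 n.toNat 1, n :: st.2) else st

def levelF (e : Int) : List Int → Array Int → List Int → Option (Array Int × List Int)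
  | [], v, acc => some (v, acc)
  | c :: rest, v, acc =>
    if c = e then none
    else
      let st := List.foldl stepF (v, acc) [c - 1, c + 1, c * 2, c - 10]
      levelF e rest st.1 st.2

def loopF (e : Int) : Nat → Array Int → List Int → Int → Int
  | 0, _, _, _ => -1
  | g + 1, v, frontier, depth =>
    if frontier ≠ [] then
      match levelF e frontier v [] with
      | none => depth
      | some st => loopF e g st.1 st.2.reverse (depth + 1)
    else -1

def fwdBfs (s : Int) (e : Int) : Int :=
  let v := aset (Array.replicate 1000001 0) (wrapIdx s) 1
  loopF e 1000002 v [s] 0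

theorem loopF_nil (e : Int) (g : Nat) (v : Array Int) (d : Int) :
    loopF e g v [] d = -1 := by
  cases g <;> simp [loopF]

theorem loopA_succ (e : Int) (f : Nat) (q v : Array Int) (w r : Nat) :
    loopA e (f + 1) q v w r =
      if w ≠ r then
        (if aget q r = e then aget v (wrapIdx e) - 1
         else
           loopA e f
             (List.foldl (stepA (aget q r)) (q, v, w)
               [aget q r - 1, aget q r + 1, aget q r * 2, aget q r - 10]).1
             (List.foldl (stepA (aget q r)) (q, v, w)
               [aget q r - 1, aget q r + 1, aget q r * 2, aget q r - 10]).2.1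
             (List.foldl (stepA (aget q r)) (q, v, w)
               [aget q r - 1, aget q r + 1, aget q r * 2, aget q r - 10]).2.2
             ((r + 1) % 1000000))
      else -1 := rfl

theorem loopF_succ (e : Int) (g : Nat) (v : Array Int) (frontier : List Int) (depth : Int) :
    loopF e (g + 1) v frontier depth =
      if frontier ≠ [] then
        (match levelF e frontier v [] with
         | none => depth
         | some st => loopF e g st.1 st.2.reverse (depth + 1))
      else -1 := rfl

-- the joint invariant tying A's circular queue to F's frontier/next lists
structure BInv (q vA vB : Array Int) (w r : Nat) (depth : Int) (rest nxt : List Int) : Prop where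
  hq : q.size = 1000000
  hva : vA.size = 1000001
  hvb : vB.size = 1000001
  hr : r < 1000000
  hw : w = (r + (rest ++ nxt).length) % 1000000
  hk : (rest ++ nxt).length ≤ 999999
  hQ : ∀ i, (h : i < (rest ++ nxt).length) → aget q ((r + i) % 1000000) = (rest ++ nxt)[i]
  hmem : ∀ x ∈ rest ++ nxt, 1 ≤ x ∧ x ≤ 1000000
  hnd : (rest ++ nxt).Nodup
  hzero : ∀ i : Nat, i ≤ 1000000 → (aget vA i = 0 ↔ aget vB i = 0)
  hdepth : 0 ≤ depth
  hrest : ∀ x ∈ rest, aget vA x.toNat = depth + 1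
  hnxt : ∀ x ∈ nxt, aget vA x.toNat = depth + 2

theorem mod_ne_of_lt (r i k : Nat) (hr : r < 1000000) (hik : i < k) (hk : k ≤ 999999) :
    (r + i) % 1000000 ≠ (r + k) % 1000000 := by
  omega

-- the inner for-loop of both versions, run in lock-step: A enqueues exactly what F
-- appends, marking the same cells
theorem expand (c depth : Int) (hdepth : 0 ≤ depth) (hcw : wrapIdx c ≤ 1000000)
    (hcmod : (1 ≤ c ∧ c ≤ 1000000) → wrapIdx c = c.toNat) :
    ∀ (ns : List Int) (q vA vB : Array Int) (w r : Nat) (content acc : List Int),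
    q.size = 1000000 → vA.size = 1000001 → vB.size = 1000001 →
    r < 1000000 → w = (r + content.length) % 1000000 →
    (∀ i, (h : i < content.length) → aget q ((r + i) % 1000000) = content[i]) →
    (∀ x ∈ content, (1 ≤ x ∧ x ≤ 1000000) ∧ x ≠ c) →
    content.Nodup →
    (∀ x ∈ content, aget vA x.toNat ≠ 0) →
    (∀ i : Nat, i ≤ 1000000 → (aget vA i = 0 ↔ aget vB i = 0)) →
    aget vA (wrapIdx c) = depth + 1 →
    ((1 ≤ c ∧ c ≤ 1000000) ∨ content.length + ns.length ≤ 100) →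
    ∃ add : List Int,
      (List.foldl (stepA c) (q, vA, w) ns).1.size = 1000000 ∧
      (List.foldl (stepA c) (q, vA, w) ns).2.1.size = 1000001 ∧
      (List.foldl stepF (vB, acc) ns).1.size = 1000001 ∧
      (List.foldl (stepA c) (q, vA, w) ns).2.2 = (r + (content ++ add).length) % 1000000 ∧
      (∀ i, (h : i < (content ++ add).length) →
        aget (List.foldl (stepA c) (q, vA, w) ns).1 ((r + i) % 1000000) = (content ++ add)[i]) ∧
      (∀ x ∈ content ++ add, (1 ≤ x ∧ x ≤ 1000000) ∧ x ≠ c) ∧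
      (content ++ add).Nodup ∧
      (∀ x ∈ content ++ add, aget (List.foldl (stepA c) (q, vA, w) ns).2.1 x.toNat ≠ 0) ∧
      (∀ i : Nat, i ≤ 1000000 →
        (aget (List.foldl (stepA c) (q, vA, w) ns).2.1 i = 0 ↔
         aget (List.foldl stepF (vB, acc) ns).1 i = 0)) ∧
      (∀ i : Nat, i ≤ 1000000 → aget vA i ≠ 0 →
        aget (List.foldl (stepA c) (q, vA, w) ns).2.1 i = aget vA i) ∧
      (∀ x ∈ add, aget (List.foldl (stepA c) (q, vA, w) ns).2.1 x.toNat = depth + 2) ∧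
      (List.foldl stepF (vB, acc) ns).2 = add.reverse ++ acc ∧
      U vA = U (List.foldl (stepA c) (q, vA, w) ns).2.1 + add.length ∧
      (content ++ add).length ≤ 999999 := by
  intro ns
  induction ns with
  | nil =>
    intro q vA vB w r content acc hq hva hvb hr hw hQ hmem hnd hmark hzero hcv hbound
    refine ⟨[], ?_⟩
    have hlen : content.length ≤ 999999 := by
      rcases hbound with ⟨hc1, hc2⟩ | hb
      · exact len_le_999999 content c hnd hmem hc1 hc2
      · omega
    simp only [List.foldl_nil]
    refine ⟨hq, hva, hvb, ?_, ?_, ?_, ?_, ?_, ?_, ?_, ?_, ?_, ?_, ?_⟩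
    · simpa using hw
    · simpa using hQ
    · simpa using hmem
    · simpa using hnd
    · simpa using hmark
    · exact hzero
    · intro i _ _
      trivial
    · first
      | trivial
      | simp
    · simp
    · simp
    · simpa using hlen
  | cons n ns ih =>
    intro q vA vB w r content acc hq hva hvb hr hw hQ hmem hnd hmark hzero hcv hbound
    simp only [List.foldl_cons]
    by_cases hg : 1 ≤ n ∧ n ≤ 1000000 ∧ aget vA n.toNat = 0
    · -- the guard fires: both sides enqueue/mark n
      obtain ⟨hn1, hn2, hn0⟩ := hg
      have hnle : n.toNat ≤ 1000000 := by omega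
      have hnB0 : aget vB n.toNat = 0 := (hzero n.toNat hnle).mp hn0
      have hnc : n ≠ c := by
        intro h
        subst h
        have := hcmod ⟨hn1, hn2⟩
        rw [this] at hcv
        rw [hcv] at hn0
        omega
      have hncont : n ∉ content := fun hx => hmark n hx hn0
      have hklt : content.length ≤ 999999 := by
        rcases hbound with ⟨hc1, hc2⟩ | hb
        · exact len_le_999999 content c hnd hmem hc1 hc2
        · omega
      have hwlt : w < 1000000 := by
        rw [hw]; omega
      have eA : stepA c (q, vA, w) n
          = (aset q w n, aset vA n.toNat (depth + 1 + 1), (w + 1) % 1000000) := by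
        simp [stepA, hn1, hn2, hn0, hcv]
      have eB : stepF (vB, acc) n = (aset vB n.toNat 1, n :: acc) := by
        simp [stepF, hn1, hn2, hnB0]
      rw [eA, eB]
      -- re-establish every hypothesis for the tail
      have hq' : (aset q w n).size = 1000000 := by rw [size_aset, hq]
      have hva' : (aset vA n.toNat (depth + 1 + 1)).size = 1000001 := by rw [size_aset, hva]
      have hvb' : (aset vB n.toNat 1).size = 1000001 := by rw [size_aset, hvb]
      have hw' : (w + 1) % 1000000 = (r + (content ++ [n]).length) % 1000000 := by
        simp only [List.length_append, List.length_cons, List.length_nil]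
        omega
      have hQ' : ∀ i, (h : i < (content ++ [n]).length) →
          aget (aset q w n) ((r + i) % 1000000) = (content ++ [n])[i] := by
        intro i hi
        simp only [List.length_append, List.length_cons, List.length_nil] at hi
        by_cases hik : i < content.length
        · have hne : w ≠ (r + i) % 1000000 := by
            rw [hw]
            exact (mod_ne_of_lt r i content.length hr hik hklt).symm
          rw [aget_aset_ne q w ((r + i) % 1000000) n hne]
          rw [hQ i hik]
          rw [List.getElem_append_left hik]
        · have hik' : i = content.length := by omega
          subst hik'
          rw [show (r + content.length) % 1000000 = w from hw.symm]
          rw [aget_aset_self q w n (by omega)]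
          simp
      have hmem' : ∀ x ∈ content ++ [n], (1 ≤ x ∧ x ≤ 1000000) ∧ x ≠ c := by
        intro x hx
        rcases List.mem_append.mp hx with hx | hx
        · exact hmem x hx
        · simp at hx
          rw [hx]
          exact ⟨⟨hn1, hn2⟩, hnc⟩
      have hnd' : (content ++ [n]).Nodup :=
        hnd.append (List.nodup_singleton n) (List.disjoint_singleton.mpr hncont)
      have hmark' : ∀ x ∈ content ++ [n],
          aget (aset vA n.toNat (depth + 1 + 1)) x.toNat ≠ 0 := by
        intro x hx
        rcases List.mem_append.mp hx with hx | hx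
        · have hx1 := (hmem x hx).1.1
          have hxn : n.toNat ≠ x.toNat := by
            intro h
            have hxe : x = n := by omega
            exact hncont (by rwa [hxe] at hx)
          rw [aget_aset_ne vA n.toNat x.toNat (depth + 1 + 1) hxn]
          exact hmark x hx
        · simp at hx
          rw [hx]
          rw [aget_aset_self vA n.toNat (depth + 1 + 1) (by omega)]
          omega
      have hzero' : ∀ i : Nat, i ≤ 1000000 →
          (aget (aset vA n.toNat (depth + 1 + 1)) i = 0 ↔ aget (aset vB n.toNat 1) i = 0) := by
        intro i hile
        by_cases hin : n.toNat = i
        · subst hin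
          rw [aget_aset_self vA n.toNat (depth + 1 + 1) (by omega),
            aget_aset_self vB n.toNat 1 (by omega)]
          constructor
          · intro h; omega
          · intro h; omega
        · rw [aget_aset_ne vA n.toNat i (depth + 1 + 1) hin,
            aget_aset_ne vB n.toNat i 1 hin]
          exact hzero i hile
      have hcv' : aget (aset vA n.toNat (depth + 1 + 1)) (wrapIdx c) = depth + 1 := by
        have hne : n.toNat ≠ wrapIdx c := by
          intro h
          rw [← h] at hcv
          rw [hcv] at hn0
          omega
        rw [aget_aset_ne vA n.toNat (wrapIdx c) (depth + 1 + 1) hne]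
        exact hcv
      have hbound' : (1 ≤ c ∧ c ≤ 1000000) ∨ (content ++ [n]).length + ns.length ≤ 100 := by
        rcases hbound with hb | hb
        · exact Or.inl hb
        · right; simp only [List.length_append, List.length_cons, List.length_nil]
          simp only [List.length_cons] at hb
          omega
      obtain ⟨add', c1, c2, c3, c4, c5, c6, c7, c8, c9, c10, c11, c12, c13, c14⟩ :=
        ih (aset q w n) (aset vA n.toNat (depth + 1 + 1)) (aset vB n.toNat 1)
          ((w + 1) % 1000000) r (content ++ [n]) (n :: acc)
          hq' hva' hvb' hr hw' hQ' hmem' hnd' hmark' hzero' hcv' hbound'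
      have hassoc : content ++ n :: add' = (content ++ [n]) ++ add' := by simp
      refine ⟨n :: add', c1, c2, c3, ?_, ?_, ?_, ?_, ?_, ?_, ?_, ?_, ?_, ?_, ?_⟩
      · rw [hassoc]; exact c4
      · rw [hassoc]; exact c5
      · rw [hassoc]; exact c6
      · rw [hassoc]; exact c7
      · rw [hassoc]; exact c8
      · exact c9
      · -- preservation: cells already marked keep their value
        intro i hile hi0
        have hin : n.toNat ≠ i := by
          intro h
          rw [h] at hn0
          exact hi0 hn0
        have : aget (aset vA n.toNat (depth + 1 + 1)) i = aget vA i :=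
          aget_aset_ne vA n.toNat i (depth + 1 + 1) hin
        rw [← this]
        exact c10 i hile (by rw [this]; exact hi0)
      · -- every added node carries distance depth+2
        intro x hx
        rcases List.mem_cons.mp hx with hx | hx
        · rw [hx]
          have hval : aget (aset vA n.toNat (depth + 1 + 1)) n.toNat = depth + 1 + 1 :=
            aget_aset_self vA n.toNat (depth + 1 + 1) (by omega)
          have := c10 n.toNat hnle (by rw [hval]; omega)
          rw [this, hval]
          omega
        · have := c11 x hx
          omega
      · rw [c12]; simp
      · have hU : U vA = U (aset vA n.toNat (depth + 1 + 1)) + 1 :=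
          U_mark vA hva n.toNat (by omega) hnle hn0 (depth + 1 + 1) (by omega)
        simp only [List.length_cons]
        omega
      · rw [hassoc]; exact c14
    · -- guard false: both sides skip n
      have eA : stepA c (q, vA, w) n = (q, vA, w) := by
        simp only [stepA]
        rw [if_neg hg]
      have eB : stepF (vB, acc) n = (vB, acc) := by
        have hgB : ¬(1 ≤ n ∧ n ≤ 1000000 ∧ aget vB n.toNat = 0) := by
          intro ⟨h1, h2, h3⟩
          exact hg ⟨h1, h2, (hzero n.toNat (by omega)).mpr h3⟩
        simp only [stepF]
        rw [if_neg hgB]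
      rw [eA, eB]
      exact ih q vA vB w r content acc hq hva hvb hr hw hQ hmem hnd hmark hzero hcv
        (by rcases hbound with hb | hb
            · exact Or.inl hb
            · right; simp only [List.length_cons] at hb; omega)


-- one iteration of A's while-loop matched against one node of F's frontier scan
theorem main_cons (e : Int) (f g : Nat)
    (IH : ∀ (q vA vB : Array Int) (w r : Nat) (rest nxtRev : List Int) (depth : Int),
      BInv q vA vB w r depth rest nxtRev.reverse →
      (rest ++ nxtRev.reverse).length + 2 * U vA ≤ f →
      U vA + (if nxtRev = [] then 0 else 1) ≤ g →
      loopA e f q vA w r =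
        (match levelF e rest vB nxtRev with
         | none => depth
         | some st => loopF e g st.1 st.2.reverse (depth + 1)))
    (q vA vB : Array Int) (w r : Nat) (c : Int) (rest nxtRev : List Int) (depth : Int)
    (hinv : BInv q vA vB w r depth (c :: rest) nxtRev.reverse)
    (hf : ((c :: rest) ++ nxtRev.reverse).length + 2 * U vA ≤ f + 1)
    (hg : U vA + (if nxtRev = [] then 0 else 1) ≤ g) :
    loopA e (f + 1) q vA w r =
      (match levelF e (c :: rest) vB nxtRev with
       | none => depth
       | some st => loopF e g st.1 st.2.reverse (depth + 1)) := by
  have hk := hinv.hk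
  have hr := hinv.hr
  have hk1 : 1 ≤ ((c :: rest) ++ nxtRev.reverse).length := by simp
  have hwr : w ≠ r := by
    rw [hinv.hw]
    omega
  have hhead : aget q r = c := by
    have h0 := hinv.hQ 0 (by simp)
    simpa [Nat.mod_eq_of_lt hinv.hr] using h0
  have hcm := hinv.hmem c (by simp)
  have hcrest : aget vA c.toNat = depth + 1 := hinv.hrest c (by simp)
  simp only [loopA]
  rw [if_pos hwr, hhead]
  simp only [levelF]
  by_cases hce : c = e
  · simp only [if_pos hce]
    rw [← hce, wrapIdx_nonneg c (by omega), hcrest]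
    omega
  · simp only [if_neg hce]
    have hndc : (c :: (rest ++ nxtRev.reverse)).Nodup := by
      simpa using hinv.hnd
    obtain ⟨hcnot, hndtail⟩ := List.nodup_cons.mp hndc
    have hr' : (r + 1) % 1000000 < 1000000 := by omega
    have hwk : w = ((r + 1) % 1000000 + (rest ++ nxtRev.reverse).length) % 1000000 := by
      rw [hinv.hw]
      simp only [List.cons_append, List.length_cons]
      omega
    have hQ' : ∀ i, (h : i < (rest ++ nxtRev.reverse).length) →
        aget q (((r + 1) % 1000000 + i) % 1000000) = (rest ++ nxtRev.reverse)[i] := by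
      intro i hi
      have h2 : ((r + 1) % 1000000 + i) % 1000000 = (r + (i + 1)) % 1000000 := by omega
      rw [h2]
      have h3 := hinv.hQ (i + 1) (by simp only [List.cons_append, List.length_cons]; omega)
      simpa using h3
    have hmem' : ∀ x ∈ rest ++ nxtRev.reverse, (1 ≤ x ∧ x ≤ 1000000) ∧ x ≠ c := by
      intro x hx
      refine ⟨hinv.hmem x (by simp [hx]), ?_⟩
      intro h
      exact hcnot (by rwa [h] at hx)
    have hmark' : ∀ x ∈ rest ++ nxtRev.reverse, aget vA x.toNat ≠ 0 := by
      intro x hx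
      have hd := hinv.hdepth
      rcases List.mem_append.mp hx with hx | hx
      · rw [hinv.hrest x (by simp [hx])]; omega
      · rw [hinv.hnxt x hx]; omega
    have hcv : aget vA (wrapIdx c) = depth + 1 := by
      rw [wrapIdx_nonneg c (by omega)]; exact hcrest
    obtain ⟨add, c1, c2, c3, c4, c5, c6, c7, c8, c9, c10, c11, c12, c13, c14⟩ :=
      expand c depth hinv.hdepth (by rw [wrapIdx_nonneg c (by omega)]; omega)
        (fun _ => wrapIdx_nonneg c (by omega))
        [c - 1, c + 1, c * 2, c - 10] q vA vB w ((r + 1) % 1000000)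
        (rest ++ nxtRev.reverse) nxtRev
        hinv.hq hinv.hva hinv.hvb hr' hwk hQ' hmem' hndtail hmark' hinv.hzero hcv
        (Or.inl ⟨by omega, by omega⟩)
    rw [c12]
    have hrevshape : (add.reverse ++ nxtRev).reverse = nxtRev.reverse ++ add := by simp
    have hshape : rest ++ (add.reverse ++ nxtRev).reverse = (rest ++ nxtRev.reverse) ++ add := by
      rw [hrevshape, List.append_assoc]
    refine IH _ _ _ _ _ rest (add.reverse ++ nxtRev) depth ⟨c1, c2, c3, hr', ?_, ?_, ?_, ?_, ?_, c9, hinv.hdepth, ?_, ?_⟩ ?_ ?_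
    · rw [hshape]; exact c4
    · rw [hshape]; exact c14
    · rw [hshape]; exact c5
    · rw [hshape]
      exact fun x hx => (c6 x hx).1
    · rw [hshape]; exact c7
    · -- current-level distances survive the marking
      intro x hx
      have hxv := hinv.hrest x (by simp [hx])
      have hx1 := (hinv.hmem x (by simp [hx])).1
      have hx2 := (hinv.hmem x (by simp [hx])).2
      have hd := hinv.hdepth
      rw [c10 x.toNat (by omega) (by rw [hxv]; omega)]
      exact hxv
    · -- next-level distances: old ones survive, new ones are fresh
      intro x hx
      rw [hrevshape] at hx
      rcases List.mem_append.mp hx with hx | hx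
      · have hxv := hinv.hnxt x hx
        have hx1 := (hinv.hmem x (by simp [hx]))
        have hd := hinv.hdepth
        rw [c10 x.toNat (by omega) (by rw [hxv]; omega)]
        exact hxv
      · exact c11 x hx
    · -- fuel bound for A
      rw [hshape]
      have e1 : ((rest ++ nxtRev.reverse) ++ add).length
          = (rest ++ nxtRev.reverse).length + add.length := List.length_append
      have e2 : ((c :: rest) ++ nxtRev.reverse).length
          = (rest ++ nxtRev.reverse).length + 1 := by simp
      omega
    · -- fuel bound for F
      have hUle := U_le vA
      have hrl : (add.reverse ++ nxtRev).length = add.length + nxtRev.length := by simp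
      have h1iff : ((add.reverse ++ nxtRev) = []) ↔ (add.reverse ++ nxtRev).length = 0 :=
        List.length_eq_zero_iff.symm
      have h2iff : (nxtRev = []) ↔ nxtRev.length = 0 := List.length_eq_zero_iff.symm
      simp only [h1iff, h2iff] at hg ⊢
      split_ifs at hg ⊢ with h1 h2 h2 <;> omega

theorem main_lemma (e : Int) :
    ∀ (f : Nat) (g : Nat) (q vA vB : Array Int) (w r : Nat) (rest nxtRev : List Int) (depth : Int),
    BInv q vA vB w r depth rest nxtRev.reverse →
    (rest ++ nxtRev.reverse).length + 2 * U vA ≤ f →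
    U vA + (if nxtRev = [] then 0 else 1) ≤ g →
    loopA e f q vA w r =
      (match levelF e rest vB nxtRev with
       | none => depth
       | some st => loopF e g st.1 st.2.reverse (depth + 1)) := by
  intro f
  induction f with
  | zero =>
    intro g q vA vB w r rest nxtRev depth hinv hf _hg
    have hlen : rest.length + nxtRev.reverse.length = 0 := by
      simp only [List.length_append] at hf
      omega
    have h1 : rest = [] := List.length_eq_zero_iff.mp (by omega)
    have h2 : nxtRev = [] := by
      rw [← List.reverse_eq_nil_iff]
      exact List.length_eq_zero_iff.mp (by omega)
    subst h1; subst h2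
    simp only [levelF, loopA, List.reverse_nil, loopF_nil]
  | succ f ihf =>
    intro g q vA vB w r rest nxtRev depth hinv hf hg
    match rest, hinv, hf with
    | c :: rest', hinv, hf =>
      exact main_cons e f g (ihf g) q vA vB w r c rest' nxtRev depth hinv hf hg
    | [], hinv, hf =>
      cases hnx : nxtRev.reverse with
      | nil =>
        have h2 : nxtRev = [] := List.reverse_eq_nil_iff.mp hnx
        subst h2
        have hweq : w = r := by
          have hw := hinv.hw
          simp only [List.nil_append, List.reverse_nil, List.length_nil, Nat.add_zero] at hw
          rw [hw]
          exact Nat.mod_eq_of_lt hinv.hr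
        simp [loopA, levelF, loopF_nil, hweq]
      | cons c tail =>
        have hnenil : nxtRev ≠ [] := by
          intro h; rw [h] at hnx; simp at hnx
        rw [if_neg (by simpa using hnenil)] at hg
        have hgpos : 1 ≤ g := by omega
        obtain ⟨g', rfl⟩ : ∃ g'', g = g'' + 1 := ⟨g - 1, by omega⟩
        simp only [levelF]
        simp only [loopF]
        rw [hnx, if_pos (by simp)]
        have hinv' : BInv q vA vB w r (depth + 1) (c :: tail) ([] : List Int).reverse := by
          obtain ⟨hq, hva, hvb, hr, hw, hk, hQ, hmem, hnd, hzero, hdepth, _hrest, hnxt⟩ := hinv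
          rw [hnx] at hw hk hQ hmem hnd hnxt
          refine ⟨hq, hva, hvb, hr, ?_, ?_, ?_, ?_, ?_, hzero, by omega, ?_, by simp⟩
          · simpa using hw
          · simpa using hk
          · simpa using hQ
          · simpa using hmem
          · simpa using hnd
          · intro x hx
            have hv := hnxt x (by simpa using hx)
            rw [hv]
            ring
        have hf' : ((c :: tail) ++ ([] : List Int).reverse).length + 2 * U vA ≤ f + 1 := by
          have hfc := hf
          rw [hnx] at hfc
          simpa using hfc
        have hg' : U vA + (if ([] : List Int) = [] then 0 else 1) ≤ g' := by
          have hUg : U vA ≤ g' := by omega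
          simpa using hUg
        have := main_cons e f g' (ihf g') q vA vB w r c tail [] (depth + 1) hinv' hf' hg'
        simpa using this

theorem A_eq_F (s e : Int) (hpre : Pre_bfs s e) : bfs s e = fwdBfs s e := by
  obtain ⟨hs1, hs2⟩ := hpre
  show bfs s e = fwdBfs s e
  have hwse : wrapIdx s ≤ 1000000 := by
    unfold wrapIdx
    split <;> omega
  have hrep1 : (Array.replicate 1000000 (0 : Int)).size = 1000000 := Array.size_replicate
  have hrep2 : (Array.replicate 1000001 (0 : Int)).size = 1000001 := Array.size_replicate
  show loopA e 2100000 (aset (Array.replicate 1000000 0) 0 s)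
      (aset (Array.replicate 1000001 0) (wrapIdx s) 1) 1 0
    = loopF e 1000002 (aset (Array.replicate 1000001 0) (wrapIdx s) 1) [s] 0
  set q0 := aset (Array.replicate 1000000 (0 : Int)) 0 s with hq0
  set v0 := aset (Array.replicate 1000001 (0 : Int)) (wrapIdx s) 1 with hv0
  have hq0s : q0.size = 1000000 := by rw [hq0, size_aset]; exact hrep1
  have hv0s : v0.size = 1000001 := by rw [hv0, size_aset]; exact hrep2
  have hget : aget q0 0 = s := by
    rw [hq0]
    exact aget_aset_self _ 0 s (by rw [hrep1]; norm_num)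
  have hvs : aget v0 (wrapIdx s) = 1 := by
    rw [hv0]
    exact aget_aset_self _ _ _ (by rw [hrep2]; omega)
  rw [show (2100000 : Nat) = 2099999 + 1 from rfl, show (1000002 : Nat) = 1000001 + 1 from rfl]
  rw [loopA_succ, loopF_succ]
  rw [if_pos (by norm_num : (1 : Nat) ≠ 0), if_pos (by simp : ([s] : List Int) ≠ [])]
  simp only [levelF]
  rw [hget]
  rw [show ((0 : Nat) + 1) % 1000000 = 1 from rfl, show ((0 : Int) + 1) = 1 from by norm_num]
  by_cases hse : s = e
  · simp only [if_pos hse]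
    rw [← hse, hvs]
    norm_num
  · simp only [if_neg hse]
    obtain ⟨add, c1, c2, c3, c4, c5, c6, c7, c8, c9, c10, c11, c12, c13, c14⟩ :=
      expand s 0 le_rfl hwse (fun h => wrapIdx_nonneg s (by omega))
        [s - 1, s + 1, s * 2, s - 10] q0 v0 v0 1 1 [] []
        hq0s hv0s hv0s (by norm_num) (by norm_num)
        (by intro i hi; simp at hi) (by intro x hx; simp at hx) (by simp)
        (by intro x hx; simp at hx) (fun i _ => Iff.rfl) (by omega)
        (Or.inr (by norm_num))
    rw [c12]
    simp only [List.append_nil, List.nil_append, List.reverse_reverse] at *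
    rcases add with _ | ⟨a, tl⟩
    · -- first expansion produced nothing: both sides answer -1
      have hw1 : (List.foldl (stepA s) (q0, v0, 1) [s - 1, s + 1, s * 2, s - 10]).2.2 = 1 := by
        rw [c4]
        simp
      rw [hw1, show (2099999 : Nat) = 2099998 + 1 from rfl, loopA_succ, loopF_nil]
      simp
    · -- hand the steady state to the level-by-level simulation
      rw [show (1000001 : Nat) = 1000000 + 1 from rfl, loopF_succ]
      rw [if_pos (by simp : (a :: tl : List Int) ≠ [])]
      rw [show (2099999 : Nat) = 2099998 + 1 from rfl]
      have hUle := U_le v0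
      have := main_cons e 2099998 1000000 (main_lemma e 2099998 1000000)
        (List.foldl (stepA s) (q0, v0, 1) [s - 1, s + 1, s * 2, s - 10]).1
        (List.foldl (stepA s) (q0, v0, 1) [s - 1, s + 1, s * 2, s - 10]).2.1
        (List.foldl stepF (v0, []) [s - 1, s + 1, s * 2, s - 10]).1
        (List.foldl (stepA s) (q0, v0, 1) [s - 1, s + 1, s * 2, s - 10]).2.2
        1 a tl [] 1
        ⟨c1, c2, c3, by norm_num, by simpa using c4, by simpa using c14,
         by simpa using c5, fun x hx => (c6 x (by simpa using hx)).1,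
         by simpa using c7, c9, by norm_num,
         ?_, by simp⟩ ?_ ?_
      · simpa using this
      · intro x hx
        have hv := c11 x (by simpa using hx)
        rw [hv]
        norm_num
      · have hlen : (a :: tl : List Int).length ≤ 999999 := by simpa using c14
        simp only [List.reverse_nil, List.append_nil, List.length_cons]
        have h13 : U v0 = U (List.foldl (stepA s) (q0, v0, 1)
            [s - 1, s + 1, s * 2, s - 10]).2.1 + (a :: tl : List Int).length := c13
        simp only [List.length_cons] at h13
        omega
      · have h13 : U v0 = U (List.foldl (stepA s) (q0, v0, 1)
            [s - 1, s + 1, s * 2, s - 10]).2.1 + (a :: tl : List Int).length := c13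
        have hU := U_le v0
        simp only [List.length_cons] at h13
        rw [if_pos (rfl : ([] : List Int) = [])]
        omega

--------------------------------------------------------------------------------
-- Part 2: the shortest-path specification
--------------------------------------------------------------------------------

def edgeP (c n : Int) : Prop :=
  (1 ≤ n ∧ n ≤ 1000000) ∧ (n = c - 1 ∨ n = c + 1 ∨ n = c * 2 ∨ n = c - 10)

def pathN : Nat → Int → Int → Prop
  | 0, a, b => a = b
  | k + 1, a, b => ∃ m, edgeP a m ∧ pathN k m b

def minDist (a b : Int) (k : Nat) : Prop := pathN k a b ∧ ∀ j < k, ¬ pathN j a b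

theorem pathN_succ_last (k : Nat) :
    ∀ a b : Int, pathN (k + 1) a b ↔ ∃ c, pathN k a c ∧ edgeP c b := by
  induction k with
  | zero =>
    intro a b
    constructor
    · rintro ⟨m, hm, he⟩
      exact ⟨a, rfl, by rwa [show m = b from he] at hm⟩
    · rintro ⟨c, hc, he⟩
      exact ⟨b, by rwa [show c = a from hc.symm ▸ rfl] at he, rfl⟩
  | succ k ih =>
    intro a b
    constructor
    · rintro ⟨m, hm, hp⟩
      obtain ⟨c, hc, he⟩ := (ih m b).mp hp
      exact ⟨c, ⟨m, hm, hc⟩, he⟩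
    · rintro ⟨c, ⟨m, hm, hp⟩, he⟩
      exact ⟨m, hm, (ih m b).mpr ⟨c, hp, he⟩⟩

theorem exists_minDist {a b : Int} {k : Nat} (h : pathN k a b) :
    ∃ j, j ≤ k ∧ minDist a b j := by
  classical
  have hex : ∃ n, pathN n a b := ⟨k, h⟩
  refine ⟨Nat.find hex, Nat.find_min' hex h, Nat.find_spec hex, ?_⟩
  intro j hj
  exact Nat.find_min hex hj

theorem minDist_unique {a b : Int} {j j' : Nat} (h : minDist a b j) (h' : minDist a b j') :
    j = j' := by
  by_contra hne
  rcases Nat.lt_or_ge j j' with hlt | hge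
  · exact h'.2 j hlt h.1
  · exact h.2 j' (by omega) h'.1

-- last-edge decomposition at exact distance (forward direction)
theorem minDist_down_last {s x : Int} {k : Nat} (h : minDist s x (k + 1)) :
    ∃ c, minDist s c k ∧ edgeP c x := by
  obtain ⟨c, hc, he⟩ := (pathN_succ_last k s x).mp h.1
  obtain ⟨j, hj, hmin⟩ := exists_minDist hc
  rcases Nat.lt_or_ge j k with hlt | hge
  · exfalso
    exact h.2 (j + 1) (by omega) ((pathN_succ_last j s x).mpr ⟨c, hmin.1, he⟩)
  · exact ⟨c, by rwa [show j = k by omega] at hmin, he⟩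

-- first-edge decomposition at exact distance (backward direction)
theorem minDist_down_first {x e : Int} {k : Nat} (h : minDist x e (k + 1)) :
    ∃ m, edgeP x m ∧ minDist m e k := by
  obtain ⟨m, he, hp⟩ := h.1
  obtain ⟨j, hj, hmin⟩ := exists_minDist hp
  rcases Nat.lt_or_ge j k with hlt | hge
  · exfalso
    exact h.2 (j + 1) (by omega) ⟨m, he, hmin.1⟩
  · exact ⟨m, he, by rwa [show j = k by omega] at hmin⟩

theorem no_level_forward {s : Int} {k : Nat} (h : ∀ x, ¬ minDist s x k) :
    ∀ m, k ≤ m → ∀ x, ¬ minDist s x m := by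
  intro m
  induction m with
  | zero => intro hm x; rw [Nat.le_zero.mp hm] at h; exact h x
  | succ m ih =>
    intro hm x hx
    rcases Nat.lt_or_ge m k with hlt | hge
    · have : m + 1 = k := by omega
      rw [this] at hx
      exact h x hx
    · obtain ⟨c, hc, _⟩ := minDist_down_last hx
      exact ih hge c hc

theorem no_level_backward {e : Int} {k : Nat}
    (h : ∀ x, 1 ≤ x → x ≤ 1000000 → ¬ minDist x e k) :
    ∀ m, k ≤ m → ∀ x, 1 ≤ x → x ≤ 1000000 → ¬ minDist x e m := by
  intro m
  induction m with
  | zero => intro hm x; rw [Nat.le_zero.mp hm] at h; exact h x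
  | succ m ih =>
    intro hm x hx1 hx2 hx
    rcases Nat.lt_or_ge m k with hlt | hge
    · have : m + 1 = k := by omega
      rw [this] at hx
      exact h x hx1 hx2 hx
    · obtain ⟨c, hce, hc⟩ := minDist_down_first hx
      exact ih hge c hce.1.1 hce.1.2 hc

theorem nopath_out_e {s e : Int} (hse : s ≠ e) (he : ¬ (1 ≤ e ∧ e ≤ 1000000)) :
    ∀ k, ¬ pathN k s e := by
  intro k hk
  cases k with
  | zero => exact hse hk
  | succ k =>
    obtain ⟨c, _, hedge⟩ := (pathN_succ_last k s e).mp hk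
    exact he hedge.1

theorem nopath_neg_s {s e : Int} (hs : s < 0) (hse : s ≠ e) :
    ∀ k, ¬ pathN k s e := by
  intro k hk
  cases k with
  | zero => exact hse hk
  | succ k =>
    obtain ⟨m, hedge, _⟩ := hk
    obtain ⟨⟨h1, _⟩, hcase⟩ := hedge
    rcases hcase with h | h | h | h <;> omega

--------------------------------------------------------------------------------
-- Part 3: correctness of the forward level BFS against the spec
--------------------------------------------------------------------------------

theorem mem_expand4 (c x : Int) :
    (x ∈ [c - 1, c + 1, c * 2, c - 10] ∧ 1 ≤ x ∧ x ≤ 1000000) ↔ edgeP c x := by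
  simp only [List.mem_cons, List.mem_singleton, edgeP]
  tauto

-- the inner 4-candidate fold of levelF, characterised
theorem foldF_spec :
    ∀ (ns : List Int) (v : Array Int) (acc : List Int),
    v.size = 1000001 → acc.Nodup →
    (∀ x ∈ acc, 1 ≤ x ∧ x ≤ 1000000 ∧ aget v x.toNat ≠ 0) →
    (List.foldl stepF (v, acc) ns).1.size = 1000001 ∧
    (∀ x : Int, 1 ≤ x → x ≤ 1000000 →
      (aget (List.foldl stepF (v, acc) ns).1 x.toNat ≠ 0 ↔ aget v x.toNat ≠ 0 ∨ x ∈ ns)) ∧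
    (∀ i : Nat, 1 ≤ i → i ≤ 1000000 → aget v i ≠ 0 → aget (List.foldl stepF (v, acc) ns).1 i ≠ 0) ∧
    (∀ x : Int, x ∈ (List.foldl stepF (v, acc) ns).2 ↔
      x ∈ acc ∨ (1 ≤ x ∧ x ≤ 1000000 ∧ aget v x.toNat = 0 ∧ x ∈ ns)) ∧
    (List.foldl stepF (v, acc) ns).2.Nodup ∧
    (∀ x ∈ (List.foldl stepF (v, acc) ns).2,
      1 ≤ x ∧ x ≤ 1000000 ∧ aget (List.foldl stepF (v, acc) ns).1 x.toNat ≠ 0) := by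
  intro ns
  induction ns with
  | nil =>
    intro v acc hv hnd hacc
    simp only [List.foldl_nil]
    refine ⟨hv, ?_, ?_, ?_, hnd, hacc⟩
    · intro x _ _; simp
    · intro i _ _ h; exact h
    · intro x; simp
  | cons n ns ih =>
    intro v acc hv hnd hacc
    simp only [List.foldl_cons]
    by_cases hg : 1 ≤ n ∧ n ≤ 1000000 ∧ aget v n.toNat = 0
    · obtain ⟨hn1, hn2, hn0⟩ := hg
      have hE : stepF (v, acc) n = (aset v n.toNat 1, n :: acc) := by
        simp [stepF, hn1, hn2, hn0]
      rw [hE]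
      have hnacc : n ∉ acc := by
        intro hx
        exact (hacc n hx).2.2 hn0
      have hv' : (aset v n.toNat 1).size = 1000001 := by rw [size_aset, hv]
      have hnd' : (n :: acc).Nodup := List.nodup_cons.mpr ⟨hnacc, hnd⟩
      have hacc' : ∀ x ∈ n :: acc, 1 ≤ x ∧ x ≤ 1000000 ∧ aget (aset v n.toNat 1) x.toNat ≠ 0 := by
        intro x hx
        rcases List.mem_cons.mp hx with hx | hx
        · rw [hx]
          refine ⟨hn1, hn2, ?_⟩
          rw [aget_aset_self v n.toNat 1 (by omega)]
          norm_num
        · obtain ⟨hx1, hx2, hx3⟩ := hacc x hx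
          refine ⟨hx1, hx2, ?_⟩
          have hne : n.toNat ≠ x.toNat := by
            intro h
            have : x = n := by omega
            exact hnacc (this ▸ hx)
          rw [aget_aset_ne v n.toNat x.toNat 1 hne]
          exact hx3
      obtain ⟨c1, c2, c3, c4, c5, c6⟩ := ih (aset v n.toNat 1) (n :: acc) hv' hnd' hacc'
      refine ⟨c1, ?_, ?_, ?_, c5, c6⟩
      · intro x hx1 hx2
        rw [c2 x hx1 hx2]
        by_cases hxn : x = n
        · rw [hxn]
          rw [aget_aset_self v n.toNat 1 (by omega)]
          constructor
          · intro _; right; simp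
          · intro _; left; norm_num
        · have hne : n.toNat ≠ x.toNat := by
            intro h; apply hxn; omega
          rw [aget_aset_ne v n.toNat x.toNat 1 hne]
          simp only [List.mem_cons]
          constructor
          · rintro (h | h)
            · exact Or.inl h
            · exact Or.inr (Or.inr h)
          · rintro (h | h | h)
            · exact Or.inl h
            · exact absurd h hxn
            · exact Or.inr h
      · intro i hi1 hi2 hi0
        apply c3 i hi1 hi2
        by_cases hin : n.toNat = i
        · rw [← hin, aget_aset_self v n.toNat 1 (by omega)]
          norm_num
        · rw [aget_aset_ne v n.toNat i 1 hin]
          exact hi0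
      · intro x
        rw [c4 x]
        by_cases hxn : x = n
        · rw [hxn]
          constructor
          · intro _; right; exact ⟨hn1, hn2, hn0, List.mem_cons_self⟩
          · intro _; left; exact List.mem_cons_self
        · have hne : n.toNat ≠ x.toNat := by
            intro h; apply hxn; omega
          constructor
          · rintro (h | ⟨h1, h2, h0, h3⟩)
            · rcases List.mem_cons.mp h with h | h
              · exact absurd h hxn
              · exact Or.inl h
            · rw [aget_aset_ne v n.toNat x.toNat 1 hne] at h0
              exact Or.inr ⟨h1, h2, h0, List.mem_cons_of_mem n h3⟩
          · rintro (h | ⟨h1, h2, h0, h3⟩)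
            · exact Or.inl (List.mem_cons_of_mem n h)
            · rcases List.mem_cons.mp h3 with h3 | h3
              · exact absurd h3 hxn
              · refine Or.inr ⟨h1, h2, ?_, h3⟩
                rw [aget_aset_ne v n.toNat x.toNat 1 hne]
                exact h0
    · have hE : stepF (v, acc) n = (v, acc) := by
        simp only [stepF]
        rw [if_neg hg]
      rw [hE]
      obtain ⟨c1, c2, c3, c4, c5, c6⟩ := ih v acc hv hnd hacc
      refine ⟨c1, ?_, c3, ?_, c5, c6⟩
      · intro x hx1 hx2
        rw [c2 x hx1 hx2]
        simp only [List.mem_cons]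
        constructor
        · rintro (h | h)
          · exact Or.inl h
          · exact Or.inr (Or.inr h)
        · rintro (h | h | h)
          · exact Or.inl h
          · left
            intro h0
            exact hg ⟨h ▸ hx1, h ▸ hx2, h ▸ h0⟩
          · exact Or.inr h
      · intro x
        rw [c4 x]
        constructor
        · rintro (h | ⟨h1, h2, h0, h3⟩)
          · exact Or.inl h
          · exact Or.inr ⟨h1, h2, h0, List.mem_cons_of_mem n h3⟩
        · rintro (h | ⟨h1, h2, h0, h3⟩)
          · exact Or.inl h
          · rcases List.mem_cons.mp h3 with h3 | h3
            · exact absurd ⟨h3 ▸ h1, h3 ▸ h2, h3 ▸ h0⟩ hg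
            · exact Or.inr ⟨h1, h2, h0, h3⟩

theorem levelF_none_iff (e : Int) :
    ∀ (fr : List Int) (v : Array Int) (acc : List Int),
    levelF e fr v acc = none ↔ e ∈ fr := by
  intro fr
  induction fr with
  | nil => intro v acc; simp [levelF]
  | cons c rest ih =>
    intro v acc
    by_cases hc : c = e
    · simp [levelF, hc]
    · simp only [levelF, if_neg hc, List.mem_cons]
      rw [ih]
      constructor
      · exact fun h => Or.inr h
      · rintro (h | h)
        · exact absurd h.symm hc
        · exact h

theorem levelF_some_spec (e : Int) :
    ∀ (fr : List Int) (v : Array Int) (acc : List Int),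
    e ∉ fr → v.size = 1000001 → acc.Nodup →
    (∀ x ∈ acc, 1 ≤ x ∧ x ≤ 1000000 ∧ aget v x.toNat ≠ 0) →
    ∃ v' nxt, levelF e fr v acc = some (v', nxt) ∧
      v'.size = 1000001 ∧
      (∀ x : Int, 1 ≤ x → x ≤ 1000000 →
        (aget v' x.toNat ≠ 0 ↔ aget v x.toNat ≠ 0 ∨ ∃ c ∈ fr, edgeP c x)) ∧
      (∀ i : Nat, 1 ≤ i → i ≤ 1000000 → aget v i ≠ 0 → aget v' i ≠ 0) ∧
      (∀ x : Int, x ∈ nxt ↔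
        x ∈ acc ∨ (1 ≤ x ∧ x ≤ 1000000 ∧ aget v x.toNat = 0 ∧ ∃ c ∈ fr, edgeP c x)) ∧
      nxt.Nodup ∧
      (∀ x ∈ nxt, 1 ≤ x ∧ x ≤ 1000000 ∧ aget v' x.toNat ≠ 0) := by
  intro fr
  induction fr with
  | nil =>
    intro v acc _ hv hnd hacc
    refine ⟨v, acc, rfl, hv, ?_, ?_, ?_, hnd, hacc⟩
    · intro x _ _; simp
    · intro i _ _ h; exact h
    · intro x; simp
  | cons c rest ih =>
    intro v acc hce hv hnd hacc
    have hcne : c ≠ e := fun h => hce (by rw [h]; exact List.mem_cons_self)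
    have hcee : ¬ (c = e) := hcne
    obtain ⟨f1, f2, f3, f4, f5, f6⟩ := foldF_spec [c - 1, c + 1, c * 2, c - 10] v acc hv hnd hacc
    obtain ⟨v', nxt, heq, g1, g2, g3, g4, g5, g6⟩ :=
      ih (List.foldl stepF (v, acc) [c - 1, c + 1, c * 2, c - 10]).1
        (List.foldl stepF (v, acc) [c - 1, c + 1, c * 2, c - 10]).2
        (fun h => hce (List.mem_cons_of_mem c h)) f1 f5 f6
    refine ⟨v', nxt, ?_, g1, ?_, ?_, ?_, g5, g6⟩
    · simp only [levelF, if_neg hcee]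
      exact heq
    · intro x hx1 hx2
      rw [g2 x hx1 hx2, f2 x hx1 hx2]
      constructor
      · rintro ((h | h) | ⟨m, hm, he'⟩)
        · exact Or.inl h
        · exact Or.inr ⟨c, List.mem_cons_self, (mem_expand4 c x).mp ⟨h, hx1, hx2⟩⟩
        · exact Or.inr ⟨m, List.mem_cons_of_mem c hm, he'⟩
      · rintro (h | ⟨m, hm, he'⟩)
        · exact Or.inl (Or.inl h)
        · rcases List.mem_cons.mp hm with hm | hm
          · exact Or.inl (Or.inr (((mem_expand4 c x).mpr (hm ▸ he')).1))
          · exact Or.inr ⟨m, hm, he'⟩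
    · intro i hi1 hi2 hi0
      exact g3 i hi1 hi2 (f3 i hi1 hi2 hi0)
    · intro x
      rw [g4 x, f4 x]
      by_cases hx12 : 1 ≤ x ∧ x ≤ 1000000
      · constructor
        · rintro ((h | ⟨h1, h2, h0, h3⟩) | ⟨h1, h2, h0, m, hm, he'⟩)
          · exact Or.inl h
          · exact Or.inr ⟨h1, h2, h0, c, List.mem_cons_self, (mem_expand4 c x).mp ⟨h3, h1, h2⟩⟩
          · have h0' : aget v x.toNat = 0 := by
              by_contra hvv
              exact f3 x.toNat (by omega) (by omega) hvv h0
            exact Or.inr ⟨h1, h2, h0', m, List.mem_cons_of_mem c hm, he'⟩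
        · rintro (h | ⟨h1, h2, h0, m, hm, he'⟩)
          · exact Or.inl (Or.inl h)
          · rcases List.mem_cons.mp hm with hm | hm
            · exact Or.inl (Or.inr ⟨h1, h2, h0, ((mem_expand4 c x).mpr (hm ▸ he')).1⟩)
            · by_cases hmk : aget (List.foldl stepF (v, acc) [c - 1, c + 1, c * 2, c - 10]).1 x.toNat = 0
              · exact Or.inr ⟨h1, h2, hmk, m, hm, he'⟩
              · rcases (f2 x h1 h2).mp hmk with hv0 | hmem
                · exact absurd h0 hv0
                · exact Or.inl (Or.inr ⟨h1, h2, h0, hmem⟩)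
      · constructor
        · rintro ((h | ⟨h1, h2, _⟩) | ⟨h1, h2, _⟩)
          · exact Or.inl h
          · exact absurd ⟨h1, h2⟩ hx12
          · exact absurd ⟨h1, h2⟩ hx12
        · rintro (h | ⟨h1, h2, _⟩)
          · exact Or.inl (Or.inl h)
          · exact absurd ⟨h1, h2⟩ hx12

structure FInv (s e : Int) (v : Array Int) (fr : List Int) (k : Nat) : Prop where
  hv : v.size = 1000001
  hfr : ∀ x, x ∈ fr ↔ minDist s x k
  hnd : fr.Nodup
  hmark : ∀ x : Int, 1 ≤ x → x ≤ 1000000 →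
    (aget v x.toNat ≠ 0 ↔ ∃ j ≤ k, pathN j s x)
  hnf : ∀ j < k, ¬ pathN j s e

-- the characterisation of the next forward level
theorem F_next_level {s e : Int} {v : Array Int} {fr : List Int} {k : Nat}
    (inv : FInv s e v fr k) (x : Int) :
    (1 ≤ x ∧ x ≤ 1000000 ∧ aget v x.toNat = 0 ∧ ∃ c ∈ fr, edgeP c x) ↔
    minDist s x (k + 1) := by
  constructor
  · rintro ⟨hx1, hx2, hx0, c, hcf, hce⟩
    have hcmin := (inv.hfr c).mp hcf
    refine ⟨(pathN_succ_last k s x).mpr ⟨c, hcmin.1, hce⟩, ?_⟩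
    intro j hj hp
    have : aget v x.toNat ≠ 0 := (inv.hmark x hx1 hx2).mpr ⟨j, by omega, hp⟩
    exact this hx0
  · intro hmin
    obtain ⟨c, hcmin, hce⟩ := minDist_down_last hmin
    have hx12 := hce.1
    refine ⟨hx12.1, hx12.2, ?_, c, (inv.hfr c).mpr hcmin, hce⟩
    by_contra hx0
    obtain ⟨j, hj, hp⟩ := (inv.hmark x hx12.1 hx12.2).mp hx0
    exact hmin.2 j (by omega) hp

theorem F_no_path {s e : Int} {v : Array Int} {k : Nat} (inv : FInv s e v [] k) :
    ∀ kk, ¬ pathN kk s e := by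
  intro kk hkk
  have hnone : ∀ x, ¬ minDist s x k := by
    intro x hx
    simpa using (inv.hfr x).mpr hx
  obtain ⟨j, hj, hmin⟩ := exists_minDist hkk
  rcases Nat.lt_or_ge j k with hlt | hge
  · exact inv.hnf j hlt hmin.1
  · exact no_level_forward hnone j hge e hmin

theorem F_run (s e : Int) :
    ∀ (g : Nat) (v : Array Int) (fr : List Int) (k : Nat),
    FInv s e v fr k → (fr ≠ [] → U v + 1 ≤ g) →
    ((∀ kk, minDist s e kk → loopF e g v fr (k : Int) = (kk : Int)) ∧
     ((∀ kk, ¬ pathN kk s e) → loopF e g v fr (k : Int) = -1)) := by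
  intro g
  induction g with
  | zero =>
    intro v fr k inv hfuel
    have hfr : fr = [] := by
      by_contra h
      have := hfuel h
      omega
    subst hfr
    constructor
    · intro kk hkk
      exact absurd hkk.1 (F_no_path inv kk)
    · intro _
      exact loopF_nil e 0 v (k : Int)
  | succ g ih =>
    intro v fr k inv hfuel
    by_cases hfre : fr = []
    · subst hfre
      constructor
      · intro kk hkk
        exact absurd hkk.1 (F_no_path inv kk)
      · intro _
        exact loopF_nil e (g + 1) v (k : Int)
    · rw [loopF_succ, if_pos hfre]
      by_cases he : e ∈ fr
      · have hnone := (levelF_none_iff e fr v []).mpr he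
        rw [hnone]
        have hek : minDist s e k := (inv.hfr e).mp he
        constructor
        · intro kk hkk
          have hkkk : kk = k := minDist_unique hkk hek
          rw [hkkk]
        · intro hnp
          exact absurd hek.1 (hnp k)
      · obtain ⟨v', nxt, heq, g1, g2, g3, g4, g5, g6⟩ :=
          levelF_some_spec e fr v [] he inv.hv (by simp) (by simp)
        rw [heq]
        have hmemnxt : ∀ x, x ∈ nxt ↔ minDist s x (k + 1) := by
          intro x
          rw [g4 x]
          simp only [List.not_mem_nil, false_or]
          exact F_next_level inv x
        have inv' : FInv s e v' nxt.reverse (k + 1) := by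
          refine ⟨g1, ?_, ?_, ?_, ?_⟩
          · intro x
            rw [List.mem_reverse]
            exact hmemnxt x
          · rw [List.nodup_reverse]
            exact g5
          · intro x hx1 hx2
            rw [g2 x hx1 hx2]
            constructor
            · rintro (h | ⟨c, hcf, hce⟩)
              · obtain ⟨j, hj, hp⟩ := (inv.hmark x hx1 hx2).mp h
                exact ⟨j, by omega, hp⟩
              · exact ⟨k + 1, le_refl _,
                  (pathN_succ_last k s x).mpr ⟨c, ((inv.hfr c).mp hcf).1, hce⟩⟩
            · rintro ⟨j, hj, hp⟩
              by_cases hold : ∃ j' ≤ k, pathN j' s x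
              · exact Or.inl ((inv.hmark x hx1 hx2).mpr hold)
              · have hjk : j = k + 1 := by
                  rcases Nat.lt_or_ge j (k + 1) with hlt | hge
                  · exact absurd ⟨j, by omega, hp⟩ hold
                  · omega
                subst hjk
                have hmin : minDist s x (k + 1) :=
                  ⟨hp, fun j' hj' hp' => hold ⟨j', by omega, hp'⟩⟩
                obtain ⟨c, hcmin, hce⟩ := minDist_down_last hmin
                exact Or.inr ⟨c, (inv.hfr c).mpr hcmin, hce⟩
          · intro j hj hp
            rcases Nat.lt_or_ge j k with hlt | hge
            · exact inv.hnf j hlt hp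
            · have hjk : j = k := by omega
              rw [hjk] at hp
              obtain ⟨j', hj', hmin⟩ := exists_minDist hp
              rcases Nat.lt_or_ge j' k with hlt' | hge'
              · exact inv.hnf j' hlt' hmin.1
              · have hj'k : j' = k := by omega
                rw [hj'k] at hmin
                exact he ((inv.hfr e).mpr hmin)
        have hfuel' : nxt.reverse ≠ [] → U v' + 1 ≤ g := by
          intro hne
          have hxex : ∃ x, x ∈ nxt := by
            cases nxt with
            | nil => simp at hne
            | cons a t => exact ⟨a, List.mem_cons_self⟩
          obtain ⟨x, hx⟩ := hxex
          obtain ⟨hx1, hx2, hxm⟩ := g6 x hx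
          have hx0 : aget v x.toNat = 0 := by
            rcases (g4 x).mp hx with h | h
            · simp at h
            · exact h.2.2.1
          have hlt := U_lt_of v v' (fun i hi1 hi2 => g3 i hi1 hi2)
            x.toNat (by omega) (by omega) hx0 hxm
          have := hfuel hfre
          omega
        have hcast : ((k : Int) + 1) = (((k + 1 : Nat)) : Int) := by push_cast; ring
        rw [hcast]
        exact ih v' nxt.reverse (k + 1) inv' hfuel'

theorem F_correct (s e : Int) (hs0 : 0 ≤ s) (hs2 : s ≤ 1000000) :
    (∀ kk, minDist s e kk → fwdBfs s e = (kk : Int)) ∧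
    ((∀ kk, ¬ pathN kk s e) → fwdBfs s e = -1) := by
  have hw : wrapIdx s = s.toNat := wrapIdx_nonneg s hs0
  have hrep : (Array.replicate 1000001 (0 : Int)).size = 1000001 := Array.size_replicate
  have hv0 : (aset (Array.replicate 1000001 0) (wrapIdx s) 1).size = 1000001 := by
    rw [size_aset, hrep]
  have hget0 : ∀ i : Nat, aget (Array.replicate 1000001 (0 : Int)) i = 0 := by
    intro i
    rw [aget, Array.getD]
    split
    · exact Array.getElem_replicate _
    · rfl
  have inv : FInv s e (aset (Array.replicate 1000001 0) (wrapIdx s) 1) [s] 0 := by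
    refine ⟨hv0, ?_, by simp, ?_, by omega⟩
    · intro x
      simp only [List.mem_singleton]
      constructor
      · intro h
        exact ⟨h.symm, by omega⟩
      · intro h
        exact h.1.symm
    · intro x hx1 hx2
      rw [hw]
      by_cases hxs : x = s
      · rw [hxs]
        rw [aget_aset_self _ s.toNat 1 (by rw [hrep]; omega)]
        constructor
        · intro _
          exact ⟨0, le_refl _, rfl⟩
        · intro _
          norm_num
      · have hne : s.toNat ≠ x.toNat := by
          intro h; apply hxs; omega
        rw [aget_aset_ne _ s.toNat x.toNat 1 hne, hget0]
        constructor
        · intro h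
          exact absurd rfl h
        · rintro ⟨j, hj, hp⟩
          have hj0 : j = 0 := by omega
          rw [hj0] at hp
          have hsx : s = x := hp
          exact absurd hsx.symm hxs
  have hfuel : ([s] : List Int) ≠ [] → U (aset (Array.replicate 1000001 0) (wrapIdx s) 1) + 1 ≤ 1000002 := by
    intro _
    have := U_le (aset (Array.replicate 1000001 0) (wrapIdx s) 1)
    omega
  have hrun := F_run s e 1000002 (aset (Array.replicate 1000001 0) (wrapIdx s) 1) [s] 0 inv hfuel
  constructor
  · intro kk hkk
    have := hrun.1 kk hkk
    simpa [fwdBfs] using this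
  · intro hnp
    have := hrun.2 hnp
    simpa [fwdBfs] using this

theorem loopF_neg (s e : Int) (hs : s < 0) (hse : s ≠ e) (v : Array Int) (g : Nat) :
    loopF e (g + 1) v [s] 0 = -1 := by
  rw [loopF_succ, if_pos (by simp : ([s] : List Int) ≠ [])]
  have e1 : stepF (v, ([] : List Int)) (s - 1) = (v, []) := by
    simp only [stepF]
    rw [if_neg]
    exact fun h => absurd h.1 (by omega)
  have e2 : stepF (v, ([] : List Int)) (s + 1) = (v, []) := by
    simp only [stepF]
    rw [if_neg]
    exact fun h => absurd h.1 (by omega)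
  have e3 : stepF (v, ([] : List Int)) (s * 2) = (v, []) := by
    simp only [stepF]
    rw [if_neg]
    exact fun h => absurd h.1 (by omega)
  have e4 : stepF (v, ([] : List Int)) (s - 10) = (v, []) := by
    simp only [stepF]
    rw [if_neg]
    exact fun h => absurd h.1 (by omega)
  simp only [levelF, if_neg hse, List.foldl_cons, List.foldl_nil, e1, e2, e3, e4]
  exact loopF_nil e g v 1

theorem fwd_neg (s e : Int) (hs : s < 0) (hs1 : -1000001 ≤ s) (hse : s ≠ e) :
    fwdBfs s e = -1 := by
  show loopF e 1000002 (aset (Array.replicate 1000001 0) (wrapIdx s) 1) [s] 0 = -1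
  rw [show (1000002 : Nat) = 1000001 + 1 from rfl]
  exact loopF_neg s e hs hse _ 1000001

--------------------------------------------------------------------------------
-- Part 4: correctness of the backward level BFS (port B) against the spec
--------------------------------------------------------------------------------

theorem mem_predsOf (p m : Int) :
    p ∈ predsOf m ↔ (m = p - 1 ∨ m = p + 1 ∨ m = p * 2 ∨ m = p - 10) := by
  unfold predsOf
  rw [PySem.Int.mod_eq_emod_of_pos (by norm_num : (0 : Int) < 2)]
  by_cases hm : m % 2 = 0
  · rw [if_pos hm, PySem.Int.floordiv_eq_ediv_of_pos (by norm_num : (0 : Int) < 2)]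
    simp only [List.mem_cons, List.not_mem_nil, or_false]
    omega
  · rw [if_neg hm]
    simp only [List.mem_cons, List.not_mem_nil, or_false]
    omega

-- the inner preds fold of levelR, characterised
theorem foldR_spec :
    ∀ (ns : List Int) (v : Array Bool) (acc : List Int),
    v.size = 1000001 → acc.Nodup →
    (∀ x ∈ acc, 1 ≤ x ∧ x ≤ 1000000 ∧ bget v x.toNat = true) →
    (List.foldl stepR (v, acc) ns).1.size = 1000001 ∧
    (∀ x : Int, 1 ≤ x → x ≤ 1000000 →
      (bget (List.foldl stepR (v, acc) ns).1 x.toNat = true ↔ bget v x.toNat = true ∨ x ∈ ns)) ∧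
    (∀ i : Nat, 1 ≤ i → i ≤ 1000000 → bget v i = true → bget (List.foldl stepR (v, acc) ns).1 i = true) ∧
    (∀ x : Int, x ∈ (List.foldl stepR (v, acc) ns).2 ↔
      x ∈ acc ∨ (1 ≤ x ∧ x ≤ 1000000 ∧ bget v x.toNat = false ∧ x ∈ ns)) ∧
    (List.foldl stepR (v, acc) ns).2.Nodup ∧
    (∀ x ∈ (List.foldl stepR (v, acc) ns).2,
      1 ≤ x ∧ x ≤ 1000000 ∧ bget (List.foldl stepR (v, acc) ns).1 x.toNat = true) := by
  intro ns
  induction ns with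
  | nil =>
    intro v acc hv hnd hacc
    simp only [List.foldl_nil]
    refine ⟨hv, ?_, ?_, ?_, hnd, hacc⟩
    · intro x _ _; simp
    · intro i _ _ h; exact h
    · intro x; simp
  | cons n ns ih =>
    intro v acc hv hnd hacc
    simp only [List.foldl_cons]
    by_cases hg : 1 ≤ n ∧ n ≤ 1000000 ∧ bget v n.toNat = false
    · obtain ⟨hn1, hn2, hn0⟩ := hg
      have hE : stepR (v, acc) n = (bset v n.toNat true, n :: acc) := by
        simp [stepR, hn1, hn2, hn0]
      rw [hE]
      have hnacc : n ∉ acc := by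
        intro hx
        have h2 := (hacc n hx).2.2
        rw [h2] at hn0
        exact Bool.noConfusion hn0
      have hv' : (bset v n.toNat true).size = 1000001 := by rw [size_bset, hv]
      have hnd' : (n :: acc).Nodup := List.nodup_cons.mpr ⟨hnacc, hnd⟩
      have hacc' : ∀ x ∈ n :: acc, 1 ≤ x ∧ x ≤ 1000000 ∧ bget (bset v n.toNat true) x.toNat = true := by
        intro x hx
        rcases List.mem_cons.mp hx with hx | hx
        · rw [hx]
          refine ⟨hn1, hn2, ?_⟩
          rw [bget_bset_self v n.toNat true (by omega)]
        · obtain ⟨hx1, hx2, hx3⟩ := hacc x hx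
          refine ⟨hx1, hx2, ?_⟩
          have hne : n.toNat ≠ x.toNat := by
            intro h
            have : x = n := by omega
            exact hnacc (this ▸ hx)
          rw [bget_bset_ne v n.toNat x.toNat true hne]
          exact hx3
      obtain ⟨c1, c2, c3, c4, c5, c6⟩ := ih (bset v n.toNat true) (n :: acc) hv' hnd' hacc'
      refine ⟨c1, ?_, ?_, ?_, c5, c6⟩
      · intro x hx1 hx2
        rw [c2 x hx1 hx2]
        by_cases hxn : x = n
        · rw [hxn]
          rw [bget_bset_self v n.toNat true (by omega)]
          constructor
          · intro _; right; simp
          · intro _; left; norm_num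
        · have hne : n.toNat ≠ x.toNat := by
            intro h; apply hxn; omega
          rw [bget_bset_ne v n.toNat x.toNat true hne]
          simp only [List.mem_cons]
          constructor
          · rintro (h | h)
            · exact Or.inl h
            · exact Or.inr (Or.inr h)
          · rintro (h | h | h)
            · exact Or.inl h
            · exact absurd h hxn
            · exact Or.inr h
      · intro i hi1 hi2 hi0
        apply c3 i hi1 hi2
        by_cases hin : n.toNat = i
        · rw [← hin, bget_bset_self v n.toNat true (by omega)]
        · rw [bget_bset_ne v n.toNat i true hin]
          exact hi0
      · intro x
        rw [c4 x]
        by_cases hxn : x = n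
        · rw [hxn]
          constructor
          · intro _; right; exact ⟨hn1, hn2, hn0, List.mem_cons_self⟩
          · intro _; left; exact List.mem_cons_self
        · have hne : n.toNat ≠ x.toNat := by
            intro h; apply hxn; omega
          constructor
          · rintro (h | ⟨h1, h2, h0, h3⟩)
            · rcases List.mem_cons.mp h with h | h
              · exact absurd h hxn
              · exact Or.inl h
            · rw [bget_bset_ne v n.toNat x.toNat true hne] at h0
              exact Or.inr ⟨h1, h2, h0, List.mem_cons_of_mem n h3⟩
          · rintro (h | ⟨h1, h2, h0, h3⟩)
            · exact Or.inl (List.mem_cons_of_mem n h)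
            · rcases List.mem_cons.mp h3 with h3 | h3
              · exact absurd h3 hxn
              · refine Or.inr ⟨h1, h2, ?_, h3⟩
                rw [bget_bset_ne v n.toNat x.toNat true hne]
                exact h0
    · have hE : stepR (v, acc) n = (v, acc) := by
        simp only [stepR]
        rw [if_neg hg]
      rw [hE]
      obtain ⟨c1, c2, c3, c4, c5, c6⟩ := ih v acc hv hnd hacc
      refine ⟨c1, ?_, c3, ?_, c5, c6⟩
      · intro x hx1 hx2
        rw [c2 x hx1 hx2]
        simp only [List.mem_cons]
        constructor
        · rintro (h | h)
          · exact Or.inl h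
          · exact Or.inr (Or.inr h)
        · rintro (h | h | h)
          · exact Or.inl h
          · left
            cases hbv : bget v x.toNat with
            | true => rfl
            | false => exact absurd ⟨h ▸ hx1, h ▸ hx2, h ▸ hbv⟩ hg
          · exact Or.inr h
      · intro x
        rw [c4 x]
        constructor
        · rintro (h | ⟨h1, h2, h0, h3⟩)
          · exact Or.inl h
          · exact Or.inr ⟨h1, h2, h0, List.mem_cons_of_mem n h3⟩
        · rintro (h | ⟨h1, h2, h0, h3⟩)
          · exact Or.inl h
          · rcases List.mem_cons.mp h3 with h3 | h3
            · exact absurd ⟨h3 ▸ h1, h3 ▸ h2, h3 ▸ h0⟩ hg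
            · exact Or.inr ⟨h1, h2, h0, h3⟩

theorem levelR_none_iff (s : Int) :
    ∀ (fr : List Int) (v : Array Bool) (acc : List Int),
    levelR s fr v acc = none ↔ ∃ m ∈ fr, s ∈ predsOf m := by
  intro fr
  induction fr with
  | nil => intro v acc; simp [levelR]
  | cons m rest ih =>
    intro v acc
    by_cases hm : s ∈ predsOf m
    · simp [levelR, hm]
    · simp only [levelR, if_neg hm]
      rw [ih]
      constructor
      · rintro ⟨m', hm', hs'⟩
        exact ⟨m', List.mem_cons_of_mem m hm', hs'⟩
      · rintro ⟨m', hm', hs'⟩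
        rcases List.mem_cons.mp hm' with h | h
        · exact absurd (h ▸ hs') hm
        · exact ⟨m', h, hs'⟩

theorem levelR_some_spec (s : Int) :
    ∀ (fr : List Int) (v : Array Bool) (acc : List Int),
    (∀ m ∈ fr, s ∉ predsOf m) → v.size = 1000001 → acc.Nodup →
    (∀ x ∈ acc, 1 ≤ x ∧ x ≤ 1000000 ∧ bget v x.toNat = true) →
    ∃ v' nxt, levelR s fr v acc = some (v', nxt) ∧
      v'.size = 1000001 ∧
      (∀ x : Int, 1 ≤ x → x ≤ 1000000 →
        (bget v' x.toNat = true ↔ bget v x.toNat = true ∨ ∃ m ∈ fr, x ∈ predsOf m)) ∧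
      (∀ i : Nat, 1 ≤ i → i ≤ 1000000 → bget v i = true → bget v' i = true) ∧
      (∀ x : Int, x ∈ nxt ↔
        x ∈ acc ∨ (1 ≤ x ∧ x ≤ 1000000 ∧ bget v x.toNat = false ∧ ∃ m ∈ fr, x ∈ predsOf m)) ∧
      nxt.Nodup ∧
      (∀ x ∈ nxt, 1 ≤ x ∧ x ≤ 1000000 ∧ bget v' x.toNat = true) := by
  intro fr
  induction fr with
  | nil =>
    intro v acc _ hv hnd hacc
    refine ⟨v, acc, rfl, hv, ?_, ?_, ?_, hnd, hacc⟩
    · intro x _ _; simp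
    · intro i _ _ h; exact h
    · intro x; simp
  | cons m rest ih =>
    intro v acc hnm hv hnd hacc
    have hm : s ∉ predsOf m := hnm m List.mem_cons_self
    obtain ⟨f1, f2, f3, f4, f5, f6⟩ := foldR_spec (predsOf m) v acc hv hnd hacc
    obtain ⟨v', nxt, heq, g1, g2, g3, g4, g5, g6⟩ :=
      ih (List.foldl stepR (v, acc) (predsOf m)).1 (List.foldl stepR (v, acc) (predsOf m)).2
        (fun m' h => hnm m' (List.mem_cons_of_mem m h)) f1 f5 f6
    refine ⟨v', nxt, ?_, g1, ?_, ?_, ?_, g5, g6⟩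
    · simp only [levelR, if_neg hm]
      exact heq
    · intro x hx1 hx2
      rw [g2 x hx1 hx2, f2 x hx1 hx2]
      constructor
      · rintro ((h | h) | ⟨m', hm', hx'⟩)
        · exact Or.inl h
        · exact Or.inr ⟨m, List.mem_cons_self, h⟩
        · exact Or.inr ⟨m', List.mem_cons_of_mem m hm', hx'⟩
      · rintro (h | ⟨m', hm', hx'⟩)
        · exact Or.inl (Or.inl h)
        · rcases List.mem_cons.mp hm' with h' | h'
          · exact Or.inl (Or.inr (h' ▸ hx'))
          · exact Or.inr ⟨m', h', hx'⟩
    · intro i hi1 hi2 hi0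
      exact g3 i hi1 hi2 (f3 i hi1 hi2 hi0)
    · intro x
      rw [g4 x, f4 x]
      by_cases hx12 : 1 ≤ x ∧ x ≤ 1000000
      · constructor
        · rintro ((h | ⟨h1, h2, h0, h3⟩) | ⟨h1, h2, h0, m', hm', hx'⟩)
          · exact Or.inl h
          · exact Or.inr ⟨h1, h2, h0, m, List.mem_cons_self, h3⟩
          · have h0' : bget v x.toNat = false := by
              cases hbv : bget v x.toNat with
              | false => rfl
              | true =>
                have := f3 x.toNat (by omega) (by omega) hbv
                rw [this] at h0
                exact Bool.noConfusion h0
            exact Or.inr ⟨h1, h2, h0', m', List.mem_cons_of_mem m hm', hx'⟩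
        · rintro (h | ⟨h1, h2, h0, m', hm', hx'⟩)
          · exact Or.inl (Or.inl h)
          · rcases List.mem_cons.mp hm' with h' | h'
            · exact Or.inl (Or.inr ⟨h1, h2, h0, h' ▸ hx'⟩)
            · by_cases hmk : bget (List.foldl stepR (v, acc) (predsOf m)).1 x.toNat = false
              · exact Or.inr ⟨h1, h2, hmk, m', h', hx'⟩
              · have hmk' : bget (List.foldl stepR (v, acc) (predsOf m)).1 x.toNat = true := by
                  cases hb : bget (List.foldl stepR (v, acc) (predsOf m)).1 x.toNat with
                  | true => rfl
                  | false => exact absurd hb hmk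
                rcases (f2 x h1 h2).mp hmk' with hv1 | hmem
                · rw [hv1] at h0
                  exact Bool.noConfusion h0
                · exact Or.inl (Or.inr ⟨h1, h2, h0, hmem⟩)
      · constructor
        · rintro ((h | ⟨h1, h2, _⟩) | ⟨h1, h2, _⟩)
          · exact Or.inl h
          · exact absurd ⟨h1, h2⟩ hx12
          · exact absurd ⟨h1, h2⟩ hx12
        · rintro (h | ⟨h1, h2, _⟩)
          · exact Or.inl (Or.inl h)
          · exact absurd ⟨h1, h2⟩ hx12

structure RInv (s e : Int) (v : Array Bool) (fr : List Int) (k : Nat) : Prop where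
  hv : v.size = 1000001
  hfr : ∀ x, x ∈ fr ↔ ((1 ≤ x ∧ x ≤ 1000000) ∧ minDist x e k)
  hnd : fr.Nodup
  hmark : ∀ x : Int, 1 ≤ x → x ≤ 1000000 →
    (bget v x.toNat = true ↔ ∃ j ≤ k, pathN j x e)
  hnf : ∀ j < k, ¬ pathN (j + 1) s e

theorem predsOf_edge (p m : Int) (hm1 : 1 ≤ m) (hm2 : m ≤ 1000000) :
    p ∈ predsOf m ↔ edgeP p m := by
  rw [mem_predsOf]
  unfold edgeP
  constructor
  · intro h
    exact ⟨⟨hm1, hm2⟩, h⟩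
  · rintro ⟨_, h⟩
    exact h

theorem loopR_nil (s : Int) (g : Nat) (v : Array Bool) (d : Int) :
    loopR s g v [] d = -1 := by
  cases g <;> simp [loopR]

theorem loopR_succ (s : Int) (g : Nat) (v : Array Bool) (frontier : List Int) (depth : Int) :
    loopR s (g + 1) v frontier depth =
      if frontier ≠ [] then
        (match levelR s frontier v [] with
         | none => depth + 1
         | some st => loopR s g st.1 st.2.reverse (depth + 1))
      else -1 := rfl

theorem R_next_level {s e : Int} {v : Array Bool} {fr : List Int} {k : Nat}
    (inv : RInv s e v fr k) (x : Int) :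
    (1 ≤ x ∧ x ≤ 1000000 ∧ bget v x.toNat = false ∧ ∃ m ∈ fr, x ∈ predsOf m) ↔
    ((1 ≤ x ∧ x ≤ 1000000) ∧ minDist x e (k + 1)) := by
  constructor
  · rintro ⟨hx1, hx2, hx0, m, hmf, hxp⟩
    have hm := (inv.hfr m).mp hmf
    have hedge : edgeP x m := (predsOf_edge x m hm.1.1 hm.1.2).mp hxp
    refine ⟨⟨hx1, hx2⟩, ⟨m, hedge, hm.2.1⟩, ?_⟩
    intro j hj hp
    have := (inv.hmark x hx1 hx2).mpr ⟨j, by omega, hp⟩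
    rw [this] at hx0
    exact Bool.noConfusion hx0
  · rintro ⟨⟨hx1, hx2⟩, hmin⟩
    obtain ⟨m, hedge, hminm⟩ := minDist_down_first hmin
    refine ⟨hx1, hx2, ?_, m, (inv.hfr m).mpr ⟨hedge.1, hminm⟩,
      (predsOf_edge x m hedge.1.1 hedge.1.2).mpr hedge⟩
    cases hbv : bget v x.toNat with
    | false => rfl
    | true =>
      obtain ⟨j, hj, hp⟩ := (inv.hmark x hx1 hx2).mp hbv
      exact absurd hp (hmin.2 j (by omega))

theorem R_no_path {s e : Int} {v : Array Bool} {k : Nat} (hse : s ≠ e)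
    (inv : RInv s e v [] k) : ∀ kk, ¬ pathN kk s e := by
  intro kk hkk
  have hnone : ∀ x, 1 ≤ x → x ≤ 1000000 → ¬ minDist x e k := by
    intro x h1 h2 hx
    simpa using (inv.hfr x).mpr ⟨⟨h1, h2⟩, hx⟩
  cases kk with
  | zero => exact hse hkk
  | succ kk =>
    obtain ⟨m, hedge, hpm⟩ := hkk
    obtain ⟨j, hj, hmin⟩ := exists_minDist hpm
    rcases Nat.lt_or_ge j k with hlt | hge
    · exact inv.hnf j hlt ⟨m, hedge, hmin.1⟩
    · exact no_level_backward hnone j hge m hedge.1.1 hedge.1.2 hmin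

theorem R_run (s e : Int) (hse : s ≠ e) :
    ∀ (g : Nat) (v : Array Bool) (fr : List Int) (k : Nat),
    RInv s e v fr k → (fr ≠ [] → UB v + 1 ≤ g) →
    ((∀ kk, minDist s e kk → loopR s g v fr (k : Int) = (kk : Int)) ∧
     ((∀ kk, ¬ pathN kk s e) → loopR s g v fr (k : Int) = -1)) := by
  intro g
  induction g with
  | zero =>
    intro v fr k inv hfuel
    have hfr : fr = [] := by
      by_contra h
      have := hfuel h
      omega
    subst hfr
    constructor
    · intro kk hkk
      exact absurd hkk.1 (R_no_path hse inv kk)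
    · intro _
      exact loopR_nil s 0 v (k : Int)
  | succ g ih =>
    intro v fr k inv hfuel
    by_cases hfre : fr = []
    · subst hfre
      constructor
      · intro kk hkk
        exact absurd hkk.1 (R_no_path hse inv kk)
      · intro _
        exact loopR_nil s (g + 1) v (k : Int)
    · rw [loopR_succ, if_pos hfre]
      by_cases hfound : ∃ m ∈ fr, s ∈ predsOf m
      · rw [(levelR_none_iff s fr v []).mpr hfound]
        obtain ⟨m, hmf, hsp⟩ := hfound
        have hm := (inv.hfr m).mp hmf
        have hedge : edgeP s m := (predsOf_edge s m hm.1.1 hm.1.2).mp hsp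
        have hmine : minDist s e (k + 1) := by
          refine ⟨⟨m, hedge, hm.2.1⟩, ?_⟩
          intro j hj hp
          cases j with
          | zero => exact hse hp
          | succ j => exact inv.hnf j (by omega) hp
        constructor
        · intro kk hkk
          have hk1 : kk = k + 1 := minDist_unique hkk hmine
          rw [hk1]
          push_cast
          ring
        · intro hnp
          exact absurd hmine.1 (hnp (k + 1))
      · have hnm : ∀ m ∈ fr, s ∉ predsOf m := by
          intro m hm hsp
          exact hfound ⟨m, hm, hsp⟩
        obtain ⟨v', nxt, heq, g1, g2, g3, g4, g5, g6⟩ :=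
          levelR_some_spec s fr v [] hnm inv.hv (by simp) (by simp)
        rw [heq]
        have hmemnxt : ∀ x, x ∈ nxt ↔ ((1 ≤ x ∧ x ≤ 1000000) ∧ minDist x e (k + 1)) := by
          intro x
          rw [g4 x]
          simp only [List.not_mem_nil, false_or]
          exact R_next_level inv x
        have inv' : RInv s e v' nxt.reverse (k + 1) := by
          refine ⟨g1, ?_, ?_, ?_, ?_⟩
          · intro x
            rw [List.mem_reverse]
            exact hmemnxt x
          · rw [List.nodup_reverse]
            exact g5
          · intro x hx1 hx2
            rw [g2 x hx1 hx2]
            constructor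
            · rintro (h | ⟨m, hmf, hxp⟩)
              · obtain ⟨j, hj, hp⟩ := (inv.hmark x hx1 hx2).mp h
                exact ⟨j, by omega, hp⟩
              · have hm := (inv.hfr m).mp hmf
                have hedge : edgeP x m := (predsOf_edge x m hm.1.1 hm.1.2).mp hxp
                exact ⟨k + 1, le_refl _, ⟨m, hedge, hm.2.1⟩⟩
            · rintro ⟨j, hj, hp⟩
              by_cases hold : ∃ j' ≤ k, pathN j' x e
              · exact Or.inl ((inv.hmark x hx1 hx2).mpr hold)
              · have hjk : j = k + 1 := by
                  rcases Nat.lt_or_ge j (k + 1) with hlt | hge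
                  · exact absurd ⟨j, by omega, hp⟩ hold
                  · omega
                rw [hjk] at hp
                have hmin : minDist x e (k + 1) :=
                  ⟨hp, fun j' hj' hp' => hold ⟨j', by omega, hp'⟩⟩
                obtain ⟨m, hedge, hminm⟩ := minDist_down_first hmin
                exact Or.inr ⟨m, (inv.hfr m).mpr ⟨hedge.1, hminm⟩,
                  (predsOf_edge x m hedge.1.1 hedge.1.2).mpr hedge⟩
          · intro j hj hp
            rcases Nat.lt_or_ge j k with hlt | hge
            · exact inv.hnf j hlt hp
            · have hjk : j = k := by omega
              rw [hjk] at hp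
              obtain ⟨m, hedge, hpm⟩ := hp
              obtain ⟨j', hj', hmin⟩ := exists_minDist hpm
              rcases Nat.lt_or_ge j' k with hlt' | hge'
              · exact inv.hnf j' hlt' ⟨m, hedge, hmin.1⟩
              · have hj'k : j' = k := by omega
                rw [hj'k] at hmin
                exact hnm m ((inv.hfr m).mpr ⟨hedge.1, hmin⟩)
                  ((predsOf_edge s m hedge.1.1 hedge.1.2).mpr hedge)
        have hfuel' : nxt.reverse ≠ [] → UB v' + 1 ≤ g := by
          intro hne
          have hxex : ∃ x, x ∈ nxt := by
            cases nxt with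
            | nil => simp at hne
            | cons a t => exact ⟨a, List.mem_cons_self⟩
          obtain ⟨x, hx⟩ := hxex
          obtain ⟨hx1, hx2, hxm⟩ := g6 x hx
          have hx0 : bget v x.toNat = false := by
            rcases (g4 x).mp hx with h | h
            · simp at h
            · exact h.2.2.1
          have hlt := UB_lt_of v v' (fun i hi1 hi2 => g3 i hi1 hi2)
            x.toNat (by omega) (by omega) hx0 hxm
          have := hfuel hfre
          omega
        have hcast : ((k : Int) + 1) = (((k + 1 : Nat)) : Int) := by push_cast; ring
        rw [hcast]
        exact ih v' nxt.reverse (k + 1) inv' hfuel'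

theorem R_correct (s e : Int) (hse : s ≠ e) (he1 : 1 ≤ e) (he2 : e ≤ 1000000) :
    (∀ kk, minDist s e kk → bfs_alt s e = (kk : Int)) ∧
    ((∀ kk, ¬ pathN kk s e) → bfs_alt s e = -1) := by
  have halt : bfs_alt s e
      = loopR s 1000002 (bset (Array.replicate 1000001 false) e.toNat true) [e] 0 := by
    unfold bfs_alt
    rw [if_neg hse, if_neg (not_not_intro ⟨he1, he2⟩)]
  have hrep : (Array.replicate 1000001 (false : Bool)).size = 1000001 := Array.size_replicate
  have hget0 : ∀ i : Nat, bget (Array.replicate 1000001 (false : Bool)) i = false := by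
    intro i
    rw [bget, Array.getD]
    split
    · exact Array.getElem_replicate _
    · rfl
  have hv0 : (bset (Array.replicate 1000001 false) e.toNat true).size = 1000001 := by
    rw [size_bset, hrep]
  have inv : RInv s e (bset (Array.replicate 1000001 false) e.toNat true) [e] 0 := by
    refine ⟨hv0, ?_, by simp, ?_, by omega⟩
    · intro x
      simp only [List.mem_singleton]
      constructor
      · intro h
        exact ⟨⟨by omega, by omega⟩, h, by omega⟩
      · rintro ⟨_, hp, _⟩
        exact hp
    · intro x hx1 hx2
      by_cases hxe : x = e
      · rw [hxe, bget_bset_self _ e.toNat true (by rw [hrep]; omega)]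
        constructor
        · intro _
          exact ⟨0, le_refl _, rfl⟩
        · intro _
          rfl
      · have hne : e.toNat ≠ x.toNat := by
          intro h; apply hxe; omega
        rw [bget_bset_ne _ e.toNat x.toNat true hne, hget0]
        constructor
        · intro h
          exact Bool.noConfusion h
        · rintro ⟨j, hj, hp⟩
          have hj0 : j = 0 := by omega
          rw [hj0] at hp
          have : x = e := hp
          exact absurd this hxe
  have hfuel : ([e] : List Int) ≠ [] →
      UB (bset (Array.replicate 1000001 false) e.toNat true) + 1 ≤ 1000002 := by
    intro _
    have := UB_le (bset (Array.replicate 1000001 false) e.toNat true)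
    omega
  have hrun := R_run s e hse 1000002 (bset (Array.replicate 1000001 false) e.toNat true) [e] 0 inv hfuel
  constructor
  · intro kk hkk
    have := hrun.1 kk hkk
    rw [halt]
    simpa using this
  · intro hnp
    have := hrun.2 hnp
    rw [halt]
    simpa using this

--------------------------------------------------------------------------------
-- Part 5: assembly
--------------------------------------------------------------------------------

theorem fwd_self (s : Int) : fwdBfs s s = 0 := by
  show loopF s 1000002 _ [s] 0 = 0
  rw [show (1000002 : Nat) = 1000001 + 1 from rfl, loopF_succ]
  simp [levelF]

-- ===== VERDICT (by name: the statement is the Claim_ definition above) =====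
theorem bfs_spec : Claim_equal_bfs := by
  intro s e _hdom hpre
  obtain ⟨h1, h2⟩ := hpre
  show bfs s e = bfs_alt s e
  rw [A_eq_F s e ⟨h1, h2⟩]
  by_cases hse : s = e
  · subst hse
    rw [fwd_self]
    simp [bfs_alt]
  · by_cases he : 1 ≤ e ∧ e ≤ 1000000
    · by_cases hs : 0 ≤ s
      · classical
        by_cases hex : ∃ kk, pathN kk s e
        · obtain ⟨kk, hkk⟩ := hex
          obtain ⟨j, _, hmin⟩ := exists_minDist hkk
          rw [(F_correct s e hs h2).1 j hmin, (R_correct s e hse he.1 he.2).1 j hmin]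
        · push_neg at hex
          rw [(F_correct s e hs h2).2 hex, (R_correct s e hse he.1 he.2).2 hex]
      · push_neg at hs
        have hnp := nopath_neg_s hs hse
        rw [fwd_neg s e hs h1 hse, (R_correct s e hse he.1 he.2).2 hnp]
    · have hnp := nopath_out_e hse he
      have halt : bfs_alt s e = -1 := by
        simp [bfs_alt, hse, he]
      rw [halt]
      by_cases hs : 0 ≤ s
      · exact (F_correct s e hs h2).2 hnp
      · exact fwd_neg s e (by omega) h1 hse
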